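-- pv_equiv track=rewrite | github.com/SS12dev/dodge-ai-fde-task | src/backend/app/graph_service.py | prioritize_connected_view
-- ===== SOURCE A (Python) =====
-- def _build_adjacency(nodes: list[dict], edges: list[dict]) -> dict[str, set[str]]:
--     node_ids = {node["id"] for node in nodes}
--     adjacency: dict[str, set[str]] = {}
--     for edge in edges:
--         source = edge.get("source")
--         target = edge.get("target")
--         if source not in node_ids or target not in node_ids:
--             continue
--         adjacency.setdefault(source, set()).add(target)
--         adjacency.setdefault(target, set()).add(source)
--     return adjacency
--
-- def _explore_component(start: str, adjacency: dict[str, set[str]], visited: set[str]) -> set[str]: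
--     stack = [start]
--     component: set[str] = set()
--     while stack:
--         current = stack.pop()
--         if current in visited:
--             continue
--         visited.add(current)
--         component.add(current)
--         for neighbor in adjacency.get(current, set()):
--             if neighbor not in visited:
--                 stack.append(neighbor)
--     return component
--
-- def _largest_connected_component(adjacency: dict[str, set[str]]) -> set[str]:
--     visited: set[str] = set()
--     largest_component: set[str] = set()
--     for start in adjacency:
--         if start in visited:
--             continue
--         component = _explore_component(start, adjacency, visited)
--         if len(component) > len(largest_component):
--             largest_component = component
--     return largest_component
--
-- def _add_transparency_samples(nodes: list[dict], keep_ids: set[str], samples_per_table: int) -> None: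
--     per_table_kept: dict[str, int] = {}
--     for node in nodes:
--         table = node.get("table", "")
--         if node["id"] in keep_ids:
--             per_table_kept[table] = per_table_kept.get(table, 0) + 1
--
--     for node in nodes:
--         node_id = node["id"]
--         table = node.get("table", "")
--         if node_id in keep_ids:
--             continue
--         current_count = per_table_kept.get(table, 0)
--         if current_count >= samples_per_table:
--             continue
--         keep_ids.add(node_id)
--         per_table_kept[table] = current_count + 1
--
-- def prioritize_connected_view(nodes: list[dict], edges: list[dict], samples_per_table: int = 1) -> tuple[list[dict], list[dict]]:
--     """
--     Keep the graph visually coherent by prioritizing the largest connected component,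
--     while retaining a tiny per-table sample for transparency.
--     """
--     if not nodes:
--         return nodes, edges
--
--     adjacency = _build_adjacency(nodes, edges)
--     if not adjacency:
--         return nodes, edges
--
--     keep_ids = _largest_connected_component(adjacency)
--     _add_transparency_samples(nodes, keep_ids, samples_per_table)
--
--     filtered_nodes = [node for node in nodes if node["id"] in keep_ids]
--     filtered_edges = [edge for edge in edges if edge.get("source") in keep_ids and edge.get("target") in keep_ids]
--     return filtered_nodes, filtered_edges
-- ===== SOURCE B (Python) =====
-- def _locate(comps, value):
--     for idx, comp in enumerate(comps):
--         if value in comp: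
--             return idx
--     return None
--
-- def _merge_components(node_ids, edges):
--     """One pass over the edges, maintaining disjoint components in discovery order."""
--     comps = []
--     for edge in edges:
--         source = edge.get("source")
--         target = edge.get("target")
--         if source not in node_ids or target not in node_ids:
--             continue
--         i = _locate(comps, source)
--         j = _locate(comps, target)
--         if i is None and j is None:
--             comps.append([source] if source == target else [source, target])
--         elif i is None:
--             comps[j].append(source)
--         elif j is None:
--             comps[i].append(target)
--         elif i != j:
--             a, b = (i, j) if i < j else (j, i)
--             comps[a].extend(comps[b])
--             del comps[b]
--     return comps
--
-- def _add_transparency_samples(nodes, keep_ids, samples_per_table):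
--     per_table_kept = {}
--     for node in nodes:
--         table = node.get("table", "")
--         if node["id"] in keep_ids:
--             per_table_kept[table] = per_table_kept.get(table, 0) + 1
--     for node in nodes:
--         node_id = node["id"]
--         table = node.get("table", "")
--         if node_id in keep_ids:
--             continue
--         current_count = per_table_kept.get(table, 0)
--         if current_count >= samples_per_table:
--             continue
--         keep_ids.add(node_id)
--         per_table_kept[table] = current_count + 1
--
-- def prioritize_connected_view(nodes, edges, samples_per_table=1):
--     node_ids = {node["id"] for node in nodes}
--     comps = _merge_components(node_ids, edges)
--     if not comps:
--         return nodes, edges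
--     best = max(len(c) for c in comps)
--     keep_ids = set(next(c for c in comps if len(c) == best))
--     _add_transparency_samples(nodes, keep_ids, samples_per_table)
--     filtered_nodes = [node for node in nodes if node["id"] in keep_ids]
--     filtered_edges = [edge for edge in edges if edge.get("source") in keep_ids and edge.get("target") in keep_ids]
--     return filtered_nodes, filtered_edges
-- ===== Notes on version B (the rewrite author's own statement) =====
-- stated objective: alternative
-- what changed: The adjacency-dict build plus stack-DFS largest-component search is replaced by a single pass over the edges that maintains disjoint components in discovery order, merging the two endpoint components of each accepted edge and then taking the first component of maximal size; the per-table transparency sampling and the final filtering are unchanged.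
import Mathlib
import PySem

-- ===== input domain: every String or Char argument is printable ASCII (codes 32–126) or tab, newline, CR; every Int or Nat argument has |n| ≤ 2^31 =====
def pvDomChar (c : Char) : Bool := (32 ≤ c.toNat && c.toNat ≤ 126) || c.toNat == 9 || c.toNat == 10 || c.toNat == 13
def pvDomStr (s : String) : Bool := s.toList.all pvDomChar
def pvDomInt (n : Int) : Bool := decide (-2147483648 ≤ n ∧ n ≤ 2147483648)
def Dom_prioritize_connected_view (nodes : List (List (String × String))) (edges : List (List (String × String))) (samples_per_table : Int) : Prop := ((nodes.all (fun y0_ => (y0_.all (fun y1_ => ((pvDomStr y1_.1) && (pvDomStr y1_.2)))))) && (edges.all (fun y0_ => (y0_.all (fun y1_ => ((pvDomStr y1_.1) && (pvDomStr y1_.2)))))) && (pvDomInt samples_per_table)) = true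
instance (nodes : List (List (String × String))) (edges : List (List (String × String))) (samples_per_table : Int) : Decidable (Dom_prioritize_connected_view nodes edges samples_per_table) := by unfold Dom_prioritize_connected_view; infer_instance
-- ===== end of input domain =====

-- B replaces the adjacency-dict + stack-DFS largest-component search by a single edge pass that
-- merges disjoint components in discovery order (objective: alternative algorithm, same results).
-- Python set-iteration (hash) order is not modelled; no result below depends on any set's order.

-- ===== PORT A =====

-- node.get(k) / node.get(k, d) on a dict argument (assoc list, first match)
def pvGet (m : List (String × String)) (k : String) : Option String := (PySem.Dict.mk m).get? k
def pvGetD (m : List (String × String)) (k d : String) : String := (PySem.Dict.mk m).getD k d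
-- `o in keep_ids` where o came from dict.get: None is never a member
def optInSet (o : Option String) (s : PySem.Set String) : Bool :=
  match o with
  | some v => s.contains v
  | none => false
-- {node["id"] for node in nodes} (node["id"]: Pre_ guarantees the key; getD's default is unreachable)
def nodeIdSet (nodes : List (List (String × String))) : PySem.Set String :=
  PySem.Set.ofList (nodes.map (fun n => pvGetD n "id" ""))

-- _build_adjacency: setdefault(k, set()).add(v) = modify k ∅ (·.add v)
def buildAdjacency (nodes : List (List (String × String))) (edges : List (List (String × String))) : PySem.Dict String (PySem.Set String) :=
  let node_ids := nodeIdSet nodes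
  edges.foldl (fun adj e =>
    let s? := pvGet e "source"
    let t? := pvGet e "target"
    if optInSet s? node_ids && optInSet t? node_ids then
      match s?, t? with
      | some s, some t => (adj.modify s [] (fun st => PySem.Set.add st t)).modify t [] (fun st => PySem.Set.add st s)
      | _, _ => adj
    else adj) PySem.Dict.empty

-- _explore_component's while loop.  fuel is a totality guard only (exploreFuel is always enough);
-- the stack keeps its top at the head, and neighbours are pushed in the neighbour set's stored
-- order (Python's set iteration order is unspecified; the resulting sets do not depend on it).
def exploreLoop (adj : PySem.Dict String (PySem.Set String)) : Nat → List String → PySem.Set String → PySem.Set String → PySem.Set String × PySem.Set String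
  | 0, _, visited, comp => (visited, comp)
  | _ + 1, [], visited, comp => (visited, comp)
  | fuel + 1, current :: rest, visited, comp =>
      if visited.contains current then exploreLoop adj fuel rest visited comp
      else
        let visited' := visited.add current
        let comp' := comp.add current
        let stack' := ((adj.getD current []).filter (fun n => !(visited'.contains n))) ++ rest
        exploreLoop adj fuel stack' visited' comp'

def exploreFuel (adj : PySem.Dict String (PySem.Set String)) : Nat :=
  adj.keys.length * ((adj.values.map List.length).sum + 1) + 1

def exploreComponent (start : String) (adj : PySem.Dict String (PySem.Set String)) (visited : PySem.Set String) : PySem.Set String × PySem.Set String :=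
  exploreLoop adj (exploreFuel adj) [start] visited []

-- _largest_connected_component
def largestComponent (adj : PySem.Dict String (PySem.Set String)) : PySem.Set String :=
  (adj.keys.foldl (fun (st : PySem.Set String × PySem.Set String) start =>
      if st.1.contains start then st
      else
        let r := exploreComponent start adj st.1
        (r.1, if st.2.length < r.2.length then r.2 else st.2))
    ([], [])).2

-- _add_transparency_samples (returns the updated keep_ids set; Python mutates it in place)
def addSamples (nodes : List (List (String × String))) (keep : PySem.Set String) (samples_per_table : Int) : PySem.Set String :=
  let per0 : PySem.Dict String Int := nodes.foldl (fun d n =>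
      if keep.contains (pvGetD n "id" "") then d.modify (pvGetD n "table" "") 0 (· + 1) else d)
    PySem.Dict.empty
  (nodes.foldl (fun (st : PySem.Set String × PySem.Dict String Int) n =>
      let node_id := pvGetD n "id" ""
      let table := pvGetD n "table" ""
      if st.1.contains node_id then st
      else
        let cnt := st.2.getD table 0
        if samples_per_table ≤ cnt then st
        else (st.1.add node_id, st.2.insert table (cnt + 1)))
    (keep, per0)).1

def filterNodes (nodes : List (List (String × String))) (keep : PySem.Set String) : List (List (String × String)) :=
  nodes.filter (fun n => keep.contains (pvGetD n "id" ""))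

def filterEdges (edges : List (List (String × String))) (keep : PySem.Set String) : List (List (String × String)) :=
  edges.filter (fun e => optInSet (pvGet e "source") keep && optInSet (pvGet e "target") keep)

def prioritize_connected_view (nodes : List (List (String × String))) (edges : List (List (String × String))) (samples_per_table : Int) : (List (List (String × String))) × (List (List (String × String))) :=
  if nodes.isEmpty then (nodes, edges)
  else
    let adj := buildAdjacency nodes edges
    if adj.size = 0 then (nodes, edges)
    else
      let keep := addSamples nodes (largestComponent adj) samples_per_table
      (filterNodes nodes keep, filterEdges edges keep)

-- ===== PORT B =====

-- _locate: first component containing the value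
def locate : List (List String) → String → Option Nat
  | [], _ => none
  | c :: cs, v => if v ∈ c then some 0 else (locate cs v).map (· + 1)

-- one edge of _merge_components' loop
def mergeStep (node_ids : PySem.Set String) (comps : List (List String)) (e : List (String × String)) : List (List String) :=
  let s? := pvGet e "source"
  let t? := pvGet e "target"
  if optInSet s? node_ids && optInSet t? node_ids then
    match s?, t? with
    | some s, some t =>
      match locate comps s, locate comps t with
      | none, none => comps ++ [if s = t then [s] else [s, t]]
      | none, some j => comps.set j (comps.getD j [] ++ [s])
      | some i, none => comps.set i (comps.getD i [] ++ [t])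
      | some i, some j =>
        if i = j then comps
        else (comps.set (min i j) (comps.getD (min i j) [] ++ comps.getD (max i j) [])).eraseIdx (max i j)
    | _, _ => comps
  else comps

def mergeComponents (node_ids : PySem.Set String) (edges : List (List (String × String))) : List (List String) :=
  edges.foldl (mergeStep node_ids) []

def prioritize_connected_view_alt (nodes : List (List (String × String))) (edges : List (List (String × String))) (samples_per_table : Int) : (List (List (String × String))) × (List (List (String × String))) :=
  let comps := mergeComponents (nodeIdSet nodes) edges
  if comps.isEmpty then (nodes, edges)
  else
    let best := (comps.map List.length).foldl Nat.max 0
    let keep0 : PySem.Set String := PySem.Set.ofList ((comps.find? (fun c => c.length == best)).getD [])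
    let keep := addSamples nodes keep0 samples_per_table
    (filterNodes nodes keep, filterEdges edges keep)

-- ===== PRECONDITION & SPEC =====
-- Pre_ excludes exactly the inputs where a node dict lacks the "id" key: there Python A (and B) raise KeyError.
def Pre_prioritize_connected_view (nodes : List (List (String × String))) (edges : List (List (String × String))) (samples_per_table : Int) : Prop :=
  nodes.all (fun n => (PySem.Dict.mk n).contains "id") = true
instance (nodes : List (List (String × String))) (edges : List (List (String × String))) (samples_per_table : Int) : Decidable (Pre_prioritize_connected_view nodes edges samples_per_table) := by unfold Pre_prioritize_connected_view; infer_instance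

def pvWitness_prioritize_connected_view : (List (List (String × String))) × (List (List (String × String))) × Int :=
  ([[("id", "a"), ("table", "t")], [("id", "b")], [("id", "c")]],
   [[("source", "a"), ("target", "b")], [("source", "x"), ("target", "a")]], 1)

def Spec_prioritize_connected_view (nodes : List (List (String × String))) (edges : List (List (String × String))) (samples_per_table : Int) (out : (List (List (String × String))) × (List (List (String × String)))) : Prop := out = prioritize_connected_view_alt nodes edges samples_per_table
instance (nodes : List (List (String × String))) (edges : List (List (String × String))) (samples_per_table : Int) (out : (List (List (String × String))) × (List (List (String × String)))) : Decidable (Spec_prioritize_connected_view nodes edges samples_per_table out) := by unfold Spec_prioritize_connected_view; infer_instance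

-- ===== CLAIM (what is proved, stated in full; the proofs are below) =====
def Claim_equal_prioritize_connected_view : Prop := ∀ (nodes : List (List (String × String))) (edges : List (List (String × String))) (samples_per_table : Int), Dom_prioritize_connected_view nodes edges samples_per_table → Pre_prioritize_connected_view nodes edges samples_per_table → Spec_prioritize_connected_view nodes edges samples_per_table (prioritize_connected_view nodes edges samples_per_table)

-- ===== LEMMAS AND PROOFS =====

-- membership-equality of Python sets (their stored order is irrelevant to every use below)
def SEq (s t : List String) : Prop := ∀ x, x ∈ s ↔ x ∈ t

-- the pairs (source, target) of the edges that both programs accept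
def accPair (N : PySem.Set String) (e : List (String × String)) : Option (String × String) :=
  match pvGet e "source", pvGet e "target" with
  | some s, some t => if N.contains s && N.contains t then some (s, t) else none
  | _, _ => none

def accList (N : PySem.Set String) (edges : List (List (String × String))) : List (String × String) :=
  edges.filterMap (accPair N)

def adjStep (d : PySem.Dict String (PySem.Set String)) (p : String × String) : PySem.Dict String (PySem.Set String) :=
  (d.modify p.1 [] (fun st => PySem.Set.add st p.2)).modify p.2 [] (fun st => PySem.Set.add st p.1)

def adjOf (ps : List (String × String)) : PySem.Dict String (PySem.Set String) :=
  ps.foldl adjStep PySem.Dict.empty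

def pairStep (comps : List (List String)) (p : String × String) : List (List String) :=
  match locate comps p.1, locate comps p.2 with
  | none, none => comps ++ [if p.1 = p.2 then [p.1] else [p.1, p.2]]
  | none, some j => comps.set j (comps.getD j [] ++ [p.1])
  | some i, none => comps.set i (comps.getD i [] ++ [p.2])
  | some i, some j =>
    if i = j then comps
    else (comps.set (min i j) (comps.getD (min i j) [] ++ comps.getD (max i j) [])).eraseIdx (max i j)

def compsOf (ps : List (String × String)) : List (List String) :=
  ps.foldl pairStep []

lemma mergeStep_eq (N : PySem.Set String) (comps : List (List String)) (e : List (String × String)) :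
    mergeStep N comps e = match accPair N e with | some p => pairStep comps p | none => comps := by
  unfold mergeStep accPair pairStep optInSet
  cases hs : pvGet e "source" <;> cases ht : pvGet e "target" <;> simp
  split <;> rfl

lemma foldl_filterMap' {α β γ : Type} (f : α → Option β) (g : γ → β → γ) (l : List α) (init : γ) :
    (l.filterMap f).foldl g init = l.foldl (fun acc a => match f a with | some b => g acc b | none => acc) init := by
  induction l generalizing init with
  | nil => rfl
  | cons a l ih => cases h : f a <;> simp [List.filterMap_cons, h, ih]

lemma mergeComponents_eq (N : PySem.Set String) (edges : List (List (String × String))) :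
    mergeComponents N edges = compsOf (accList N edges) := by
  unfold mergeComponents compsOf accList
  rw [foldl_filterMap']
  apply List.foldl_ext
  intro comps e _
  rw [mergeStep_eq N comps e]
  cases accPair N e <;> rfl

lemma buildAdjacency_eq (nodes edges : List (List (String × String))) :
    buildAdjacency nodes edges = adjOf (accList (nodeIdSet nodes) edges) := by
  unfold buildAdjacency adjOf accList
  rw [foldl_filterMap']
  apply List.foldl_ext
  intro d e _
  unfold accPair adjStep optInSet
  cases hs : pvGet e "source" <;> cases ht : pvGet e "target" <;> simp
  split <;> rfl



def flatPairs (ps : List (String × String)) : List String := ps.flatMap (fun p => [p.1, p.2])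

def PRel (ps : List (String × String)) (x y : String) : Prop := (x, y) ∈ ps ∨ (y, x) ∈ ps

def Conn (ps : List (String × String)) : String → String → Prop := Relation.ReflTransGen (PRel ps)

lemma keys_modify_add (d : PySem.Dict String (PySem.Set String)) (k : String) (f : PySem.Set String → PySem.Set String) :
    (d.modify k [] f).keys = PySem.Set.add d.keys k := by
  rw [PySem.Dict.keys_modify]
  by_cases hc : d.contains k
  · rw [PySem.Dict.keys_insert_of_contains _ _ hc,
      PySem.Set.add_of_mem ((PySem.Dict.contains_iff_mem_keys _ _).mp hc)]
  · rw [PySem.Dict.keys_insert_of_not_contains _ _ (by simpa using hc),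
      PySem.Set.add_of_not_mem (fun m => hc ((PySem.Dict.contains_iff_mem_keys _ _).mpr m))]

lemma adjStep_mem (d : PySem.Dict String (PySem.Set String)) (p : String × String) (x y : String) :
    y ∈ (adjStep d p).getD x [] ↔ y ∈ d.getD x [] ∨ (x = p.1 ∧ y = p.2) ∨ (x = p.2 ∧ y = p.1) := by
  unfold adjStep
  rw [PySem.Dict.getD_modify]
  by_cases h2 : x = p.2
  · rw [if_pos h2, PySem.Set.mem_add, PySem.Dict.getD_modify]
    by_cases h1 : p.2 = p.1
    · rw [if_pos h1, PySem.Set.mem_add]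
      simp only [h2, h1, and_true, true_and]
      tauto
    · rw [if_neg h1]
      simp only [h2, true_and]
      have h12 : ¬ (p.2 = p.1 ∧ y = p.2) := fun hh => h1 hh.1
      tauto
  · rw [if_neg h2, PySem.Dict.getD_modify]
    by_cases h1 : x = p.1
    · rw [if_pos h1, PySem.Set.mem_add]
      have h12 : ¬ (x = p.2 ∧ y = p.1) := fun hh => h2 hh.1
      simp only [h1, true_and]
      have h12' : ¬ (p.1 = p.2 ∧ y = p.1) := fun hh => h2 (h1.trans hh.1)
      tauto
    · rw [if_neg h1]
      simp only [h1, h2, false_and, or_false]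

lemma adjOf_getD_aux (ps : List (String × String)) :
    ∀ (d : PySem.Dict String (PySem.Set String)) (x y : String),
      y ∈ (ps.foldl adjStep d).getD x [] ↔ y ∈ d.getD x [] ∨ PRel ps x y := by
  induction ps with
  | nil => intro d x y; simp [PRel]
  | cons p ps ih =>
    intro d x y
    rw [List.foldl_cons, ih, adjStep_mem]
    simp only [PRel, List.mem_cons, Prod.ext_iff]
    tauto

lemma adjOf_getD (ps : List (String × String)) (x y : String) :
    y ∈ (adjOf ps).getD x [] ↔ PRel ps x y := by
  unfold adjOf
  rw [adjOf_getD_aux]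
  simp [PySem.Dict.getD_empty]

lemma adjStep_keys (d : PySem.Dict String (PySem.Set String)) (p : String × String) :
    (adjStep d p).keys = PySem.Set.add (PySem.Set.add d.keys p.1) p.2 := by
  unfold adjStep
  rw [keys_modify_add, keys_modify_add]

lemma adjOf_keys_aux (ps : List (String × String)) :
    ∀ (d : PySem.Dict String (PySem.Set String)),
      (ps.foldl adjStep d).keys = PySem.Set.update d.keys (flatPairs ps) := by
  induction ps with
  | nil => intro d; simp [flatPairs, PySem.Set.update]
  | cons p ps ih =>
    intro d
    rw [List.foldl_cons, ih, adjStep_keys]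
    show _ = PySem.Set.update d.keys (p.1 :: p.2 :: flatPairs ps)
    rw [PySem.Set.update_cons, PySem.Set.update_cons]

lemma adjOf_keys (ps : List (String × String)) :
    (adjOf ps).keys = PySem.Set.ofList (flatPairs ps) := by
  unfold adjOf
  rw [adjOf_keys_aux]
  simp [PySem.Dict.keys_empty, PySem.Set.update_nil_left]

lemma dict_getD_len_le (d : PySem.Dict String (PySem.Set String)) (x : String) :
    (d.getD x []).length ≤ (d.values.map List.length).sum := by
  unfold PySem.Dict.getD
  cases hg : d.get? x with
  | none => simp
  | some v =>
    unfold PySem.Dict.get? at hg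
    rcases Option.map_eq_some_iff.mp hg with ⟨p, hp, rfl⟩
    have hv : p.2 ∈ d.values := List.mem_map.mpr ⟨p, List.mem_of_find?_eq_some hp, rfl⟩
    simpa using List.single_le_sum (by simp) _ (List.mem_map.mpr ⟨p.2, hv, rfl⟩)

lemma dict_size_zero_iff (d : PySem.Dict String (PySem.Set String)) : d.size = 0 ↔ d.keys = [] := by
  unfold PySem.Dict.size PySem.Dict.keys
  simp [List.length_eq_zero_iff]


-- reachability along the adjacency dict
def AConn (adj : PySem.Dict String (PySem.Set String)) (x y : String) : Prop :=
  Relation.ReflTransGen (fun a b => b ∈ adj.getD a []) x y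

def nvis (keys : List String) (visited : PySem.Set String) : Nat :=
  keys.countP (fun k => decide (k ∈ visited))

def dfsMeasure (adj : PySem.Dict String (PySem.Set String)) (stack : List String) (visited : PySem.Set String) : Nat :=
  (adj.keys.length - nvis adj.keys visited) * ((adj.values.map List.length).sum + 1) + stack.length

lemma nvis_add (keys : List String) (visited : PySem.Set String) (k : String)
    (hnd : keys.Nodup) (hk : k ∈ keys) (hnv : k ∉ visited) :
    nvis keys (visited.add k) = nvis keys visited + 1 := by
  unfold nvis
  induction keys with
  | nil => cases hk
  | cons a keys ih =>
    rw [List.countP_cons, List.countP_cons]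
    by_cases hak : a = k
    · subst hak
      have ha : a ∉ keys := (List.nodup_cons.mp hnd).1
      have hcongr : keys.countP (fun x => decide (x ∈ visited.add a)) = keys.countP (fun x => decide (x ∈ visited)) :=
        List.countP_congr (fun x hx => by
          have hxa : x ≠ a := fun h => ha (h ▸ hx)
          simp [PySem.Set.mem_add, hxa])
      rw [hcongr]
      simp [PySem.Set.mem_add, hnv]
    · have hk' : k ∈ keys := by
        rcases List.mem_cons.mp hk with h | h
        · exact absurd h.symm hak
        · exact h
      have ih' := ih (List.nodup_cons.mp hnd).2 hk'
      have hae : decide (a ∈ visited.add k) = decide (a ∈ visited) := by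
        simp [PySem.Set.mem_add, hak]
      rw [hae, ih']
      omega

lemma nvis_lt (keys : List String) (visited : PySem.Set String) (k : String)
    (hk : k ∈ keys) (hnv : k ∉ visited) : nvis keys visited < keys.length := by
  unfold nvis
  by_contra h
  have := List.countP_eq_length.mp (Nat.le_antisymm List.countP_le_length (Nat.le_of_not_lt h))
  exact hnv (by simpa using this k hk)


lemma exploreLoop_cons (adj : PySem.Dict String (PySem.Set String)) (fuel : Nat) (current : String) (rest : List String) (visited comp : PySem.Set String) :
    exploreLoop adj (fuel + 1) (current :: rest) visited comp =
      if visited.contains current then exploreLoop adj fuel rest visited comp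
      else exploreLoop adj fuel
        (((adj.getD current []).filter (fun n => !((visited.add current).contains n))) ++ rest)
        (visited.add current) (comp.add current) := rfl

-- conclusions of the DFS loop at a terminal state (empty stack)
lemma dfs_final (adj : PySem.Dict String (PySem.Set String)) (start : String)
    (visited₀ visited comp : PySem.Set String)
    (hsym : ∀ x y, y ∈ adj.getD x [] → x ∈ adj.getD y [])
    (hv₀cl : ∀ x ∈ visited₀, ∀ y, y ∈ adj.getD x [] → y ∈ visited₀)
    (hs₀ : start ∉ visited₀)
    (hstart : start ∈ visited)
    (hcl : ∀ x ∈ visited, ∀ y, y ∈ adj.getD x [] → y ∈ visited)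
    (hvchar : ∀ x ∈ visited, x ∈ visited₀ ∨ AConn adj start x)
    (hv₀sub : ∀ x ∈ visited₀, x ∈ visited)
    (hcomp : ∀ x, x ∈ comp ↔ x ∈ visited ∧ x ∉ visited₀) :
    (∀ x, x ∈ visited ↔ x ∈ visited₀ ∨ AConn adj start x) ∧
    (∀ x, x ∈ comp ↔ AConn adj start x ∧ x ∉ visited₀) := by
  have hconn_mem : ∀ x, AConn adj start x → x ∈ visited := by
    intro x h
    induction h with
    | refl => exact hstart
    | tail _ hstep ih => exact hcl _ ih _ hstep
  have hconn_nv₀ : ∀ x, AConn adj start x → x ∉ visited₀ := by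
    intro x h
    induction h with
    | refl => exact hs₀
    | tail _ hstep ih =>
      intro hc
      exact ih (hv₀cl _ hc _ (hsym _ _ hstep))
  constructor
  · intro x
    exact ⟨fun hx => hvchar x hx, fun hx => hx.elim (hv₀sub x) (hconn_mem x)⟩
  · intro x
    rw [hcomp]
    constructor
    · rintro ⟨hv, hnv⟩
      exact ⟨(hvchar x hv).resolve_left hnv, hnv⟩
    · rintro ⟨hc, hnv⟩
      exact ⟨hconn_mem x hc, hnv⟩

lemma exploreLoop_spec (adj : PySem.Dict String (PySem.Set String)) (start : String)
    (visited₀ : PySem.Set String)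
    (hsym : ∀ x y, y ∈ adj.getD x [] → x ∈ adj.getD y [])
    (hsub : ∀ x y, y ∈ adj.getD x [] → y ∈ adj.keys)
    (hknd : adj.keys.Nodup)
    (hv₀cl : ∀ x ∈ visited₀, ∀ y, y ∈ adj.getD x [] → y ∈ visited₀)
    (hs₀ : start ∉ visited₀) :
    ∀ (fuel : Nat) (stack : List String) (visited comp : PySem.Set String),
    dfsMeasure adj stack visited ≤ fuel →
    (∀ x ∈ stack, x ∈ adj.keys) →
    (∀ x ∈ stack, AConn adj start x) →
    (start ∈ visited ∨ start ∈ stack) →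
    (∀ x ∈ visited, ∀ y, y ∈ adj.getD x [] → y ∈ visited ∨ y ∈ stack) →
    (∀ x ∈ visited, x ∈ visited₀ ∨ AConn adj start x) →
    (∀ x ∈ visited₀, x ∈ visited) →
    (∀ x, x ∈ comp ↔ x ∈ visited ∧ x ∉ visited₀) →
    comp.Nodup →
    (∀ x, x ∈ (exploreLoop adj fuel stack visited comp).1 ↔ x ∈ visited₀ ∨ AConn adj start x) ∧
    (∀ x, x ∈ (exploreLoop adj fuel stack visited comp).2 ↔ AConn adj start x ∧ x ∉ visited₀) ∧
    (exploreLoop adj fuel stack visited comp).2.Nodup := by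
  intro fuel
  induction fuel with
  | zero =>
    intro stack visited comp hμ hsubs hconns hst hcl hvchar hv₀sub hcomp hnd
    have hstack : stack = [] := by
      have : stack.length = 0 := by
        have := hμ
        unfold dfsMeasure at this
        omega
      exact List.length_eq_zero_iff.mp this
    subst hstack
    have hstart : start ∈ visited := hst.resolve_right (by simp)
    have hcl' : ∀ x ∈ visited, ∀ y, y ∈ adj.getD x [] → y ∈ visited := by
      intro x hx y hy
      exact (hcl x hx y hy).resolve_right (by simp)
    have := dfs_final adj start visited₀ visited comp hsym hv₀cl hs₀ hstart hcl' hvchar hv₀sub hcomp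
    exact ⟨fun x => by simpa [exploreLoop] using this.1 x,
           fun x => by simpa [exploreLoop] using this.2 x,
           by simpa [exploreLoop] using hnd⟩
  | succ fuel ih =>
    intro stack visited comp hμ hsubs hconns hst hcl hvchar hv₀sub hcomp hnd
    match stack with
    | [] =>
      have hstart : start ∈ visited := hst.resolve_right (by simp)
      have hcl' : ∀ x ∈ visited, ∀ y, y ∈ adj.getD x [] → y ∈ visited := by
        intro x hx y hy
        exact (hcl x hx y hy).resolve_right (by simp)
      have := dfs_final adj start visited₀ visited comp hsym hv₀cl hs₀ hstart hcl' hvchar hv₀sub hcomp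
      exact ⟨fun x => by simpa [exploreLoop] using this.1 x,
             fun x => by simpa [exploreLoop] using this.2 x,
             by simpa [exploreLoop] using hnd⟩
    | current :: rest =>
      by_cases hcur : current ∈ visited
      · have hloop : exploreLoop adj (fuel + 1) (current :: rest) visited comp = exploreLoop adj fuel rest visited comp := by
          rw [exploreLoop_cons, if_pos ((PySem.Set.contains_iff visited current).mpr hcur)]
        rw [hloop]
        apply ih rest visited comp
        · unfold dfsMeasure at hμ ⊢
          simp only [List.length_cons] at hμ
          omega
        · exact fun x hx => hsubs x (List.mem_cons_of_mem _ hx)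
        · exact fun x hx => hconns x (List.mem_cons_of_mem _ hx)
        · rcases hst with h | h
          · exact Or.inl h
          · rcases List.mem_cons.mp h with rfl | h'
            · exact Or.inl hcur
            · exact Or.inr h'
        · intro x hx y hy
          rcases hcl x hx y hy with h | h
          · exact Or.inl h
          · rcases List.mem_cons.mp h with rfl | h'
            · exact Or.inl hcur
            · exact Or.inr h'
        · exact hvchar
        · exact hv₀sub
        · exact hcomp
        · exact hnd
      · have hccon : PySem.Set.contains visited current = false := by
          rcases h : PySem.Set.contains visited current
          · rfl
          · exact absurd ((PySem.Set.contains_iff visited current).mp h) hcur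
        have hloop : exploreLoop adj (fuel + 1) (current :: rest) visited comp =
            exploreLoop adj fuel
              (((adj.getD current []).filter (fun n => !((visited.add current).contains n))) ++ rest)
              (visited.add current) (comp.add current) := by
          rw [exploreLoop_cons, if_neg (by rw [hccon]; simp)]
        rw [hloop]
        have hcurK : current ∈ adj.keys := hsubs current List.mem_cons_self
        have hcurC : AConn adj start current := hconns current List.mem_cons_self
        have hcur₀ : current ∉ visited₀ := fun h => hcur (hv₀sub current h)
        set visited' := visited.add current with hv'
        set stack' := ((adj.getD current []).filter (fun n => !(visited'.contains n))) ++ rest with hst'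
        apply ih stack' visited' (comp.add current)
        · -- measure decreases
          unfold dfsMeasure at hμ ⊢
          have hnv : nvis adj.keys visited' = nvis adj.keys visited + 1 := nvis_add _ _ _ hknd hcurK hcur
          have hlt : nvis adj.keys visited < adj.keys.length := nvis_lt _ _ _ hcurK hcur
          have hfl : stack'.length ≤ ((adj.values.map List.length).sum) + rest.length := by
            rw [hst', List.length_append]
            have h1 : ((adj.getD current []).filter (fun n => !(visited'.contains n))).length ≤ (adj.getD current []).length :=
              List.length_filter_le _ _
            have h2 := dict_getD_len_le adj current
            omega
          rw [hnv]
          set N := adj.keys.length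
          set D := (adj.values.map List.length).sum
          set v := nvis adj.keys visited
          have hexp : (N - v) * (D + 1) = (N - (v + 1)) * (D + 1) + (D + 1) := by
            have : N - v = (N - (v + 1)) + 1 := by omega
            rw [this]
            ring
          simp only [List.length_cons] at hμ
          omega
        · -- stack ⊆ keys
          intro x hx
          rcases List.mem_append.mp hx with h | h
          · exact hsub current x (List.mem_of_mem_filter h)
          · exact hsubs x (List.mem_cons_of_mem _ h)
        · -- stack all reachable
          intro x hx
          rcases List.mem_append.mp hx with h | h
          · exact Relation.ReflTransGen.tail hcurC (List.mem_of_mem_filter h)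
          · exact hconns x (List.mem_cons_of_mem _ h)
        · -- start in visited or stack
          rcases hst with h | h
          · exact Or.inl ((PySem.Set.mem_add _ _ _).mpr (Or.inl h))
          · rcases List.mem_cons.mp h with rfl | h'
            · exact Or.inl ((PySem.Set.mem_add _ _ _).mpr (Or.inr rfl))
            · exact Or.inr (List.mem_append.mpr (Or.inr h'))
        · -- closure up to stack
          intro x hx y hy
          rcases (PySem.Set.mem_add _ _ _).mp hx with hxv | rfl
          · rcases hcl x hxv y hy with h | h
            · exact Or.inl ((PySem.Set.mem_add _ _ _).mpr (Or.inl h))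
            · rcases List.mem_cons.mp h with rfl | h'
              · exact Or.inl ((PySem.Set.mem_add _ _ _).mpr (Or.inr rfl))
              · exact Or.inr (List.mem_append.mpr (Or.inr h'))
          · by_cases hyv : y ∈ visited'
            · exact Or.inl hyv
            · refine Or.inr (List.mem_append.mpr (Or.inl ?_))
              refine List.mem_filter.mpr ⟨hy, ?_⟩
              have hcc : visited'.contains y = false := by
                cases hcc2 : visited'.contains y
                · rfl
                · exact absurd ((PySem.Set.contains_iff _ _).mp hcc2) hyv
              rw [hcc]
              rfl
        · -- visited char
          intro x hx
          rcases (PySem.Set.mem_add _ _ _).mp hx with h | rfl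
          · exact hvchar x h
          · exact Or.inr hcurC
        · -- visited₀ ⊆ visited'
          exact fun x hx => (PySem.Set.mem_add _ _ _).mpr (Or.inl (hv₀sub x hx))
        · -- comp char
          intro x
          rw [PySem.Set.mem_add, PySem.Set.mem_add, hcomp]
          constructor
          · rintro (⟨hv, hnv⟩ | rfl)
            · exact ⟨Or.inl hv, hnv⟩
            · exact ⟨Or.inr rfl, hcur₀⟩
          · rintro ⟨hv | rfl, hnv⟩
            · exact Or.inl ⟨hv, hnv⟩
            · exact Or.inr rfl
        · exact PySem.Set.nodup_add _ _ hnd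


-- ----- pure list tools for the component-list reasoning -----

lemma set_append_len {α : Type} (pre : List α) (x c : α) (post : List α) :
    (pre ++ c :: post).set pre.length x = pre ++ x :: post := by
  induction pre with
  | nil => rfl
  | cons a pre ih => simp [List.set_cons_succ, ih]

lemma eraseIdx_append_len {α : Type} (pre : List α) (c : α) (post : List α) :
    (pre ++ c :: post).eraseIdx pre.length = pre ++ post := by
  induction pre with
  | nil => rfl
  | cons a pre ih => simp [ih]

lemma getD_append_len {α : Type} [Inhabited α] (pre : List α) (c : α) (post : List α) (d : α) :
    (pre ++ c :: post).getD pre.length d = c := by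
  induction pre with
  | nil => rfl
  | cons a pre ih => simpa using ih

lemma double_split {α : Type} {l p1 p2 s1 s2 : List α} {x y : α}
    (h1 : l = p1 ++ x :: s1) (h2 : l = p2 ++ y :: s2) (hlt : p1.length < p2.length) :
    ∃ mid, p2 = p1 ++ x :: mid ∧ s1 = mid ++ y :: s2 := by
  have h := h1.symm.trans h2
  rcases List.append_eq_append_iff.mp h with ⟨a', ha1, ha2⟩ | ⟨c', hc1, hc2⟩
  · cases a' with
    | nil =>
      exfalso
      have := congrArg List.length ha1
      simp at this
      omega
    | cons z mid =>
      rw [List.cons_append] at ha2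
      have hx : x = z := (List.cons.injEq _ _ _ _).mp ha2 |>.1
      have hs : s1 = mid ++ y :: s2 := (List.cons.injEq _ _ _ _).mp ha2 |>.2
      exact ⟨mid, by rw [ha1, hx], hs⟩
  · exfalso
    have := congrArg List.length hc1
    simp at this
    omega

lemma disjoint_unique {l : List (List String)}
    (hdisj : l.Pairwise (fun c d => ∀ x, x ∈ c → x ∉ d))
    {c c' : List String} (hc : c ∈ l) (hc' : c' ∈ l) {x : String} (hx : x ∈ c) (hx' : x ∈ c') :
    c = c' := by
  induction l with
  | nil => cases hc
  | cons a l ih =>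
    have hd := List.pairwise_cons.mp hdisj
    rcases List.mem_cons.mp hc with rfl | hcl
    · rcases List.mem_cons.mp hc' with rfl | hcl'
      · rfl
      · exact absurd hx' (hd.1 c' hcl' x hx)
    · rcases List.mem_cons.mp hc' with rfl | hcl'
      · exact absurd hx (hd.1 c hcl x hx')
      · exact ih hd.2 hcl hcl'

lemma locate_eq_none_iff (comps : List (List String)) (v : String) :
    locate comps v = none ↔ ∀ c ∈ comps, v ∉ c := by
  induction comps with
  | nil => simp [locate]
  | cons c comps ih =>
    by_cases hv : v ∈ c <;> simp [locate, hv, ih]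

lemma locate_eq_some (comps : List (List String)) (v : String) (i : Nat)
    (h : locate comps v = some i) :
    ∃ pre c post, comps = pre ++ c :: post ∧ pre.length = i ∧ v ∈ c ∧ ∀ c' ∈ pre, v ∉ c' := by
  induction comps generalizing i with
  | nil => cases h
  | cons c comps ih =>
    by_cases hv : v ∈ c
    · rw [locate, if_pos hv] at h
      cases h
      exact ⟨[], c, comps, rfl, rfl, hv, by simp⟩
    · rw [locate, if_neg hv] at h
      rcases Option.map_eq_some_iff.mp h with ⟨i', hi', rfl⟩
      rcases ih i' hi' with ⟨pre, c', post, hdec, hlen, hvc, hpre⟩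
      refine ⟨c :: pre, c', post, by rw [hdec]; rfl, by simp [hlen], hvc, ?_⟩
      intro c'' hc''
      rcases List.mem_cons.mp hc'' with rfl | h'
      · exact hv
      · exact hpre c'' h'

lemma findIdx_congr_mem {α : Type} (l : List α) (p q : α → Bool)
    (h : ∀ x ∈ l, p x = q x) : l.findIdx p = l.findIdx q := by
  induction l with
  | nil => rfl
  | cons a l ih =>
    rw [List.findIdx_cons, List.findIdx_cons, h a List.mem_cons_self,
      ih (fun x hx => h x (List.mem_cons_of_mem _ hx))]

lemma findIdx_or_min {α : Type} (l : List α) (p q : α → Bool) :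
    l.findIdx (fun x => p x || q x) = min (l.findIdx p) (l.findIdx q) := by
  induction l with
  | nil => rfl
  | cons a l ih =>
    rw [List.findIdx_cons, List.findIdx_cons, List.findIdx_cons]
    cases hp : p a <;> cases hq : q a <;>
      simp only [hp, hq, Bool.false_or, Bool.or_false, Bool.or_self, Bool.true_or, Bool.or_true,
        cond_false, cond_true, ih] <;> omega


def KeysOf (ps : List (String × String)) : PySem.Set String := PySem.Set.ofList (flatPairs ps)

def cellIdx (K : List String) (c : List String) : Nat := K.findIdx (fun k => decide (k ∈ c))

def CompsInv (ps : List (String × String)) (comps : List (List String)) : Prop :=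
  (∀ c ∈ comps, c ≠ []) ∧
  (∀ c ∈ comps, c.Nodup) ∧
  comps.Pairwise (fun c d => ∀ x, x ∈ c → x ∉ d) ∧
  (∀ x, (∃ c ∈ comps, x ∈ c) ↔ x ∈ flatPairs ps) ∧
  (∀ p ∈ ps, ∃ c ∈ comps, p.1 ∈ c ∧ p.2 ∈ c) ∧
  (∀ c ∈ comps, ∀ x ∈ c, ∀ y ∈ c, Conn ps x y) ∧
  (comps.map (cellIdx (KeysOf ps))).Pairwise (· < ·)

lemma flatPairs_append (ps : List (String × String)) (p : String × String) :
    flatPairs (ps ++ [p]) = flatPairs ps ++ [p.1, p.2] := by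
  simp [flatPairs]

lemma conn_mono (ps : List (String × String)) (p : String × String) {x y : String}
    (h : Conn ps x y) : Conn (ps ++ [p]) x y := by
  refine Relation.ReflTransGen.mono ?_ h
  intro a b hab
  exact hab.imp (List.mem_append_left _) (List.mem_append_left _)

lemma prel_last (ps : List (String × String)) (p : String × String) :
    PRel (ps ++ [p]) p.1 p.2 :=
  Or.inl (List.mem_append_right _ (by simp))

lemma prel_symm' {ps : List (String × String)} {x y : String} (h : PRel ps x y) : PRel ps y x :=
  h.symm

-- appending fresh elements to the key list leaves old cells' first indices unchanged
lemma old_cellIdx (K ext c : List String) (x : String) (hx : x ∈ c) (hxK : x ∈ K) :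
    cellIdx (K ++ ext) c = cellIdx K c ∧ cellIdx K c < K.length := by
  have hlt : K.findIdx (fun k => decide (k ∈ c)) < K.length :=
    List.findIdx_lt_length.mpr ⟨x, hxK, by simpa using hx⟩
  unfold cellIdx
  rw [List.findIdx_append, if_pos hlt]
  exact ⟨rfl, hlt⟩

lemma keysOf_append_decomp (ps : List (String × String)) (p : String × String) :
    ∃ ext : List String, KeysOf (ps ++ [p]) = KeysOf ps ++ ext ∧
      (∀ x ∈ ext, x ∉ KeysOf ps) ∧ (∀ x ∈ ext, x = p.1 ∨ x = p.2) ∧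
      (p.1 ∉ KeysOf ps → p.1 ∈ ext) := by
  have h : KeysOf (ps ++ [p]) = (PySem.Set.add (KeysOf ps) p.1).add p.2 := by
    unfold KeysOf
    rw [flatPairs_append, PySem.Set.ofList_append]
    rfl
  by_cases h1 : p.1 ∈ KeysOf ps
  · by_cases h2 : p.2 ∈ KeysOf ps
    · refine ⟨[], by rw [h, PySem.Set.add_of_mem h1, PySem.Set.add_of_mem h2, List.append_nil], by simp, by simp, fun hc => absurd h1 hc⟩
    · refine ⟨[p.2], ?_, ?_, ?_, fun hc => absurd h1 hc⟩
      · rw [h, PySem.Set.add_of_mem h1, PySem.Set.add_of_not_mem h2]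
      · intro x hx; rcases List.mem_singleton.mp hx with rfl; exact h2
      · intro x hx; rcases List.mem_singleton.mp hx with rfl; exact Or.inr rfl
  · have h1' : p.1 ∈ PySem.Set.add (KeysOf ps) p.1 := (PySem.Set.mem_add _ _ _).mpr (Or.inr rfl)
    by_cases h2 : p.2 ∈ PySem.Set.add (KeysOf ps) p.1
    · refine ⟨[p.1], ?_, ?_, ?_, fun _ => List.mem_singleton_self _⟩
      · rw [h, PySem.Set.add_of_mem h2, PySem.Set.add_of_not_mem h1]
      · intro x hx; rcases List.mem_singleton.mp hx with rfl; exact h1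
      · intro x hx; rcases List.mem_singleton.mp hx with rfl; exact Or.inl rfl
    · refine ⟨[p.1, p.2], ?_, ?_, ?_, fun _ => List.mem_cons_self⟩
      · rw [h, PySem.Set.add_of_not_mem h2, PySem.Set.add_of_not_mem h1]
        simp
      · intro x hx
        rcases List.mem_cons.mp hx with rfl | hx'
        · exact h1
        · rcases List.mem_singleton.mp hx' with rfl
          intro hc
          exact h2 ((PySem.Set.mem_add _ _ _).mpr (Or.inl hc))
      · intro x hx
        rcases List.mem_cons.mp hx with rfl | hx'
        · exact Or.inl rfl
        · rcases List.mem_singleton.mp hx' with rfl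
          exact Or.inr rfl


lemma extend_inv (ps : List (String × String)) (p : String × String)
    (comps pre post : List (List String)) (ct : List String)
    (h : CompsInv ps comps)
    (hdec : comps = pre ++ ct :: post)
    (v w : String)
    (hvw : v = p.1 ∧ w = p.2 ∨ v = p.2 ∧ w = p.1)
    (hvf : ∀ c ∈ comps, v ∉ c) (hwct : w ∈ ct) :
    CompsInv (ps ++ [p]) (pre ++ (ct ++ [v]) :: post) := by
  obtain ⟨hne, hnd, hdisj, hcov, hcls, hcon, hord⟩ := h
  have hmem_flat : ∀ c ∈ comps, ∀ x ∈ c, x ∈ flatPairs ps := by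
    intro c hc x hx
    exact (hcov x).mp ⟨c, hc, hx⟩
  have hvflat : v ∉ flatPairs ps := by
    intro hvf'
    rcases (hcov v).mpr hvf' with ⟨c, hc, hvc⟩
    exact hvf c hc hvc
  have hct : ct ∈ comps := by rw [hdec]; exact List.mem_append_right _ List.mem_cons_self
  have hwflat : w ∈ flatPairs ps := hmem_flat ct hct w hwct
  have hrel : PRel (ps ++ [p]) v w := by
    rcases hvw with ⟨rfl, rfl⟩ | ⟨rfl, rfl⟩
    · exact prel_last ps p
    · exact prel_symm' (prel_last ps p)
  have hmemcomps : ∀ c, c ∈ pre ∨ c ∈ post → c ∈ comps := by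
    intro c hc
    rw [hdec]
    rcases hc with h | h
    · exact List.mem_append_left _ h
    · exact List.mem_append_right _ (List.mem_cons_of_mem _ h)
  have hflat' : flatPairs (ps ++ [p]) = flatPairs ps ++ [p.1, p.2] := flatPairs_append ps p
  have hvp : v = p.1 ∨ v = p.2 := by rcases hvw with ⟨rfl, _⟩ | ⟨rfl, _⟩; exacts [Or.inl rfl, Or.inr rfl]
  have hmemX : ∀ x, x ∈ ct ++ [v] ↔ x ∈ ct ∨ x = v := by intro x; simp
  refine ⟨?_, ?_, ?_, ?_, ?_, ?_, ?_⟩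
  · intro c hc
    rcases List.mem_append.mp hc with h | h
    · exact hne c (hmemcomps c (Or.inl h))
    · rcases List.mem_cons.mp h with rfl | h'
      · simp
      · exact hne c (hmemcomps c (Or.inr h'))
  · intro c hc
    rcases List.mem_append.mp hc with h | h
    · exact hnd c (hmemcomps c (Or.inl h))
    · rcases List.mem_cons.mp h with rfl | h'
      · rw [List.nodup_append]
        refine ⟨hnd ct hct, List.nodup_singleton _, ?_⟩
        intro a ha b hb
        rcases List.mem_singleton.mp hb with rfl
        exact fun hab => hvf ct hct (hab ▸ ha)
      · exact hnd c (hmemcomps c (Or.inr h'))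
  · have hdisj' : (pre ++ ct :: post).Pairwise (fun c d => ∀ x, x ∈ c → x ∉ d) := hdec ▸ hdisj
    rw [List.pairwise_middle (fun {c d} h x hxd hxc => h x hxc hxd)] at hdisj'
    rcases List.pairwise_cons.mp hdisj' with ⟨hctd, hrest⟩
    rw [List.pairwise_middle (fun {c d} h x hxd hxc => h x hxc hxd), List.pairwise_cons]
    refine ⟨?_, hrest⟩
    intro d hd x hx
    rcases (hmemX x).mp hx with hxct | rfl
    · exact hctd d hd x hxct
    · intro hvd
      rcases List.mem_append.mp hd with h | h
      · exact hvf d (hmemcomps d (Or.inl h)) hvd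
      · exact hvf d (hmemcomps d (Or.inr h)) hvd
  · intro x
    rw [hflat']
    constructor
    · rintro ⟨c, hc, hxc⟩
      rcases List.mem_append.mp hc with h | h
      · exact List.mem_append_left _ (hmem_flat c (hmemcomps c (Or.inl h)) x hxc)
      · rcases List.mem_cons.mp h with rfl | h'
        · rcases (hmemX x).mp hxc with hxct | rfl
          · exact List.mem_append_left _ (hmem_flat ct hct x hxct)
          · rcases hvp with rfl | rfl
            · exact List.mem_append_right _ List.mem_cons_self
            · exact List.mem_append_right _ (by simp)
        · exact List.mem_append_left _ (hmem_flat c (hmemcomps c (Or.inr h')) x hxc)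
    · intro hx
      rcases List.mem_append.mp hx with h | h
      · rcases (hcov x).mpr h with ⟨c, hc, hxc⟩
        rw [hdec] at hc
        rcases List.mem_append.mp hc with h' | h'
        · exact ⟨c, List.mem_append_left _ h', hxc⟩
        · rcases List.mem_cons.mp h' with hceq | h''
          · exact ⟨ct ++ [v], List.mem_append_right _ List.mem_cons_self, List.mem_append_left _ (hceq ▸ hxc)⟩
          · exact ⟨c, List.mem_append_right _ (List.mem_cons_of_mem _ h''), hxc⟩
      · have hXmem : ct ++ [v] ∈ pre ++ (ct ++ [v]) :: post := List.mem_append_right _ List.mem_cons_self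
        have hvin : v ∈ ct ++ [v] := (hmemX v).mpr (Or.inr rfl)
        have hwin : w ∈ ct ++ [v] := (hmemX w).mpr (Or.inl hwct)
        rcases List.mem_cons.mp h with rfl | h'
        · -- x = p.1
          rcases hvw with ⟨hv, hw⟩ | ⟨hv, hw⟩
          · exact ⟨ct ++ [v], hXmem, hv ▸ hvin⟩
          · exact ⟨ct ++ [v], hXmem, hw ▸ hwin⟩
        · rcases List.mem_singleton.mp h' with rfl
          rcases hvw with ⟨hv, hw⟩ | ⟨hv, hw⟩
          · exact ⟨ct ++ [v], hXmem, hw ▸ hwin⟩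
          · exact ⟨ct ++ [v], hXmem, hv ▸ hvin⟩
  · intro q hq
    rcases List.mem_append.mp hq with h | h
    · rcases hcls q h with ⟨c, hc, h1, h2⟩
      rw [hdec] at hc
      rcases List.mem_append.mp hc with h' | h'
      · exact ⟨c, List.mem_append_left _ h', h1, h2⟩
      · rcases List.mem_cons.mp h' with hceq | h''
        · exact ⟨ct ++ [v], List.mem_append_right _ List.mem_cons_self,
            List.mem_append_left _ (hceq ▸ h1), List.mem_append_left _ (hceq ▸ h2)⟩
        · exact ⟨c, List.mem_append_right _ (List.mem_cons_of_mem _ h''), h1, h2⟩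
    · rcases List.mem_singleton.mp h with rfl
      refine ⟨ct ++ [v], List.mem_append_right _ List.mem_cons_self, ?_, ?_⟩
      · rcases hvw with ⟨hv, hw⟩ | ⟨hv, hw⟩
        · exact hv ▸ (hmemX v).mpr (Or.inr rfl)
        · exact hw ▸ (hmemX w).mpr (Or.inl hwct)
      · rcases hvw with ⟨hv, hw⟩ | ⟨hv, hw⟩
        · exact hw ▸ (hmemX w).mpr (Or.inl hwct)
        · exact hv ▸ (hmemX v).mpr (Or.inr rfl)
  · intro c hc x hx y hy
    have hconn_vw : Conn (ps ++ [p]) v w := Relation.ReflTransGen.single hrel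
    have hconn_wv : Conn (ps ++ [p]) w v := Relation.ReflTransGen.single (prel_symm' hrel)
    rcases List.mem_append.mp hc with h | h
    · exact conn_mono _ _ (hcon c (hmemcomps c (Or.inl h)) x hx y hy)
    · rcases List.mem_cons.mp h with rfl | h'
      · rcases (hmemX x).mp hx with hxct | rfl <;> rcases (hmemX y).mp hy with hyct | rfl
        · exact conn_mono _ _ (hcon ct hct x hxct y hyct)
        · exact Relation.ReflTransGen.trans (conn_mono _ _ (hcon ct hct x hxct w hwct)) hconn_wv
        · exact Relation.ReflTransGen.trans hconn_vw (conn_mono _ _ (hcon ct hct w hwct y hyct))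
        · exact Relation.ReflTransGen.refl
      · exact conn_mono _ _ (hcon c (hmemcomps c (Or.inr h')) x hx y hy)
  · rcases keysOf_append_decomp ps p with ⟨ext, hKe, hfreshext, hextv, hp1ext⟩
    have hvK : v ∉ KeysOf ps := by
      intro hc
      exact hvflat (by simpa [KeysOf, PySem.Set.mem_ofList] using hc)
    have hwK : w ∈ KeysOf ps := by
      simpa [KeysOf, PySem.Set.mem_ofList] using hwflat
    rw [hKe]
    have hXidx : cellIdx (KeysOf ps ++ ext) (ct ++ [v]) = cellIdx (KeysOf ps) ct := by
      unfold cellIdx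
      have hcong : (KeysOf ps).findIdx (fun k => decide (k ∈ ct ++ [v])) =
          (KeysOf ps).findIdx (fun k => decide (k ∈ ct)) := by
        apply findIdx_congr_mem
        intro x hxK
        apply decide_eq_decide.mpr
        constructor
        · intro hx
          rcases List.mem_append.mp hx with h | h
          · exact h
          · rcases List.mem_singleton.mp h with rfl
            exact absurd hxK hvK
        · exact List.mem_append_left _
      have hlt : (KeysOf ps).findIdx (fun k => decide (k ∈ ct)) < (KeysOf ps).length :=
        List.findIdx_lt_length.mpr ⟨w, hwK, by simpa using hwct⟩
      rw [List.findIdx_append, hcong, if_pos hlt]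
    have hmapeq : (pre ++ (ct ++ [v]) :: post).map (cellIdx (KeysOf ps ++ ext)) =
        (pre ++ ct :: post).map (cellIdx (KeysOf ps)) := by
      have h1 : pre.map (cellIdx (KeysOf ps ++ ext)) = pre.map (cellIdx (KeysOf ps)) := by
        apply List.map_congr_left
        intro c hc
        rcases List.exists_mem_of_ne_nil c (hne c (hmemcomps c (Or.inl hc))) with ⟨x, hx⟩
        have hxK : x ∈ KeysOf ps := by
          simpa [KeysOf, PySem.Set.mem_ofList] using hmem_flat c (hmemcomps c (Or.inl hc)) x hx
        exact (old_cellIdx _ ext c x hx hxK).1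
      have h2 : post.map (cellIdx (KeysOf ps ++ ext)) = post.map (cellIdx (KeysOf ps)) := by
        apply List.map_congr_left
        intro c hc
        rcases List.exists_mem_of_ne_nil c (hne c (hmemcomps c (Or.inr hc))) with ⟨x, hx⟩
        have hxK : x ∈ KeysOf ps := by
          simpa [KeysOf, PySem.Set.mem_ofList] using hmem_flat c (hmemcomps c (Or.inr hc)) x hx
        exact (old_cellIdx _ ext c x hx hxK).1
      rw [List.map_append, List.map_append, List.map_cons, List.map_cons, h1, h2, hXidx]
    rw [hmapeq, ← hdec]
    exact hord


lemma keysOf_eq_of_mem (ps : List (String × String)) (p : String × String)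
    (h1 : p.1 ∈ flatPairs ps) (h2 : p.2 ∈ flatPairs ps) :
    KeysOf (ps ++ [p]) = KeysOf ps := by
  rcases keysOf_append_decomp ps p with ⟨ext, hKe, hfresh, hextv, _⟩
  have hext : ext = [] := by
    cases hx : ext with
    | nil => rfl
    | cons a ext' =>
      exfalso
      have ha : a ∈ ext := hx ▸ List.mem_cons_self
      rcases hextv a ha with rfl | rfl
      · exact hfresh _ ha (by simpa [KeysOf, PySem.Set.mem_ofList] using h1)
      · exact hfresh _ ha (by simpa [KeysOf, PySem.Set.mem_ofList] using h2)
  rw [hKe, hext, List.append_nil]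

lemma unchanged_inv (ps : List (String × String)) (p : String × String)
    (comps : List (List String)) (h : CompsInv ps comps)
    (hcell : ∃ c ∈ comps, p.1 ∈ c ∧ p.2 ∈ c) :
    CompsInv (ps ++ [p]) comps := by
  obtain ⟨hne, hnd, hdisj, hcov, hcls, hcon, hord⟩ := h
  rcases hcell with ⟨c0, hc0, h1c, h2c⟩
  have h1f : p.1 ∈ flatPairs ps := (hcov p.1).mp ⟨c0, hc0, h1c⟩
  have h2f : p.2 ∈ flatPairs ps := (hcov p.2).mp ⟨c0, hc0, h2c⟩
  refine ⟨hne, hnd, hdisj, ?_, ?_, ?_, ?_⟩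
  · intro x
    rw [flatPairs_append]
    constructor
    · intro hx
      exact List.mem_append_left _ ((hcov x).mp hx)
    · intro hx
      rcases List.mem_append.mp hx with h | h
      · exact (hcov x).mpr h
      · rcases List.mem_cons.mp h with rfl | h'
        · exact ⟨c0, hc0, h1c⟩
        · rcases List.mem_singleton.mp h' with rfl
          exact ⟨c0, hc0, h2c⟩
  · intro q hq
    rcases List.mem_append.mp hq with h | h
    · exact hcls q h
    · rcases List.mem_singleton.mp h with rfl
      exact ⟨c0, hc0, h1c, h2c⟩
  · intro c hc x hx y hy
    exact conn_mono _ _ (hcon c hc x hx y hy)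
  · rw [keysOf_eq_of_mem ps p h1f h2f]
    exact hord

lemma merge_inv (ps : List (String × String)) (p : String × String)
    (comps pre mid post : List (List String)) (ca cb : List String)
    (h : CompsInv ps comps)
    (hdec : comps = pre ++ ca :: (mid ++ cb :: post))
    (hp1 : p.1 ∈ ca ∨ p.1 ∈ cb) (hp2 : p.2 ∈ ca ∨ p.2 ∈ cb)
    (u w : String) (hu : u ∈ ca) (hw : w ∈ cb) (hrel : PRel (ps ++ [p]) u w) :
    CompsInv (ps ++ [p]) (pre ++ (ca ++ cb) :: (mid ++ post)) := by
  obtain ⟨hne, hnd, hdisj, hcov, hcls, hcon, hord⟩ := h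
  have hca : ca ∈ comps := by rw [hdec]; exact List.mem_append_right _ List.mem_cons_self
  have hcb : cb ∈ comps := by
    rw [hdec]
    exact List.mem_append_right _ (List.mem_cons_of_mem _ (List.mem_append_right _ List.mem_cons_self))
  have hmemcomps : ∀ c, c ∈ pre ∨ c ∈ mid ∨ c ∈ post → c ∈ comps := by
    intro c hc
    rw [hdec]
    rcases hc with h | h | h
    · exact List.mem_append_left _ h
    · exact List.mem_append_right _ (List.mem_cons_of_mem _ (List.mem_append_left _ h))
    · exact List.mem_append_right _ (List.mem_cons_of_mem _ (List.mem_append_right _ (List.mem_cons_of_mem _ h)))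
  have hmem_flat : ∀ c ∈ comps, ∀ x ∈ c, x ∈ flatPairs ps := by
    intro c hc x hx
    exact (hcov x).mp ⟨c, hc, hx⟩
  have h1f : p.1 ∈ flatPairs ps := by
    rcases hp1 with h | h
    · exact hmem_flat ca hca _ h
    · exact hmem_flat cb hcb _ h
  have h2f : p.2 ∈ flatPairs ps := by
    rcases hp2 with h | h
    · exact hmem_flat ca hca _ h
    · exact hmem_flat cb hcb _ h
  -- disjointness decomposition
  have hdisj' : (pre ++ ca :: (mid ++ cb :: post)).Pairwise (fun c d => ∀ x, x ∈ c → x ∉ d) := hdec ▸ hdisj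
  rw [List.pairwise_middle (fun {c d} h x hxd hxc => h x hxc hxd)] at hdisj'
  rcases List.pairwise_cons.mp hdisj' with ⟨hcad, hrest⟩
  rw [← List.append_assoc, List.pairwise_middle (fun {c d} h x hxd hxc => h x hxc hxd)] at hrest
  rcases List.pairwise_cons.mp hrest with ⟨hcbd, hrest2⟩
  have hcacb : ∀ x, x ∈ ca → x ∉ cb := by
    have : cb ∈ pre ++ (mid ++ cb :: post) :=
      List.mem_append_right _ (List.mem_append_right _ List.mem_cons_self)
    exact hcad cb this
  have hconn_uw : Conn (ps ++ [p]) u w := Relation.ReflTransGen.single hrel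
  have hconn_wu : Conn (ps ++ [p]) w u := Relation.ReflTransGen.single (prel_symm' hrel)
  refine ⟨?_, ?_, ?_, ?_, ?_, ?_, ?_⟩
  · intro c hc
    rcases List.mem_append.mp hc with h | h
    · exact hne c (hmemcomps c (Or.inl h))
    · rcases List.mem_cons.mp h with rfl | h'
      · intro hc'
        exact hne ca hca (by rcases List.append_eq_nil_iff.mp hc' with ⟨h1, _⟩; exact h1)
      · rcases List.mem_append.mp h' with h'' | h''
        · exact hne c (hmemcomps c (Or.inr (Or.inl h'')))
        · exact hne c (hmemcomps c (Or.inr (Or.inr h'')))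
  · intro c hc
    rcases List.mem_append.mp hc with h | h
    · exact hnd c (hmemcomps c (Or.inl h))
    · rcases List.mem_cons.mp h with rfl | h'
      · rw [List.nodup_append]
        refine ⟨hnd ca hca, hnd cb hcb, ?_⟩
        intro a ha b hb hab
        exact hcacb a ha (hab ▸ hb)
      · rcases List.mem_append.mp h' with h'' | h''
        · exact hnd c (hmemcomps c (Or.inr (Or.inl h'')))
        · exact hnd c (hmemcomps c (Or.inr (Or.inr h'')))
  · rw [List.pairwise_middle (fun {c d} h x hxd hxc => h x hxc hxd), List.pairwise_cons]
    constructor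
    · intro d hd x hx
      have hd' : d ∈ pre ++ (mid ++ cb :: post) ∨ d ∈ (pre ++ mid) ++ post := by
        rcases List.mem_append.mp hd with h | h
        · exact Or.inl (List.mem_append_left _ h)
        · rcases List.mem_append.mp h with h' | h'
          · exact Or.inl (List.mem_append_right _ (List.mem_append_left _ h'))
          · exact Or.inr (List.mem_append_right _ h')
      rcases List.mem_append.mp hx with hxa | hxb
      · rcases hd' with hdl | _
        · exact hcad d hdl x hxa
        · -- d ∈ (pre++mid)++post also lies in the first shape
          have : d ∈ pre ++ (mid ++ cb :: post) := by
            rcases List.mem_append.mp (by assumption : d ∈ (pre ++ mid) ++ post) with h | h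
            · rcases List.mem_append.mp h with h' | h'
              · exact List.mem_append_left _ h'
              · exact List.mem_append_right _ (List.mem_append_left _ h')
            · exact List.mem_append_right _ (List.mem_append_right _ (List.mem_cons_of_mem _ h))
          exact hcad d this x hxa
      · have : d ∈ (pre ++ mid) ++ post := by
          rcases List.mem_append.mp hd with h | h
          · exact List.mem_append_left _ (List.mem_append_left _ h)
          · rcases List.mem_append.mp h with h' | h'
            · exact List.mem_append_left _ (List.mem_append_right _ h')
            · exact List.mem_append_right _ h'
        exact hcbd d this x hxb
    · rw [← List.append_assoc]
      exact hrest2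
  · intro x
    rw [flatPairs_append]
    constructor
    · rintro ⟨c, hc, hxc⟩
      rcases List.mem_append.mp hc with h | h
      · exact List.mem_append_left _ (hmem_flat c (hmemcomps c (Or.inl h)) x hxc)
      · rcases List.mem_cons.mp h with rfl | h'
        · rcases List.mem_append.mp hxc with h'' | h''
          · exact List.mem_append_left _ (hmem_flat ca hca x h'')
          · exact List.mem_append_left _ (hmem_flat cb hcb x h'')
        · rcases List.mem_append.mp h' with h'' | h''
          · exact List.mem_append_left _ (hmem_flat c (hmemcomps c (Or.inr (Or.inl h''))) x hxc)
          · exact List.mem_append_left _ (hmem_flat c (hmemcomps c (Or.inr (Or.inr h''))) x hxc)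
    · intro hx
      have hXmem : ca ++ cb ∈ pre ++ (ca ++ cb) :: (mid ++ post) := List.mem_append_right _ List.mem_cons_self
      rcases List.mem_append.mp hx with h | h
      · rcases (hcov x).mpr h with ⟨c, hc, hxc⟩
        rw [hdec] at hc
        rcases List.mem_append.mp hc with h' | h'
        · exact ⟨c, List.mem_append_left _ h', hxc⟩
        · rcases List.mem_cons.mp h' with hceq | h''
          · exact ⟨ca ++ cb, hXmem, List.mem_append_left _ (hceq ▸ hxc)⟩
          · rcases List.mem_append.mp h'' with h3 | h3
            · exact ⟨c, List.mem_append_right _ (List.mem_cons_of_mem _ (List.mem_append_left _ h3)), hxc⟩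
            · rcases List.mem_cons.mp h3 with hceq | h4
              · exact ⟨ca ++ cb, hXmem, List.mem_append_right _ (hceq ▸ hxc)⟩
              · exact ⟨c, List.mem_append_right _ (List.mem_cons_of_mem _ (List.mem_append_right _ h4)), hxc⟩
      · rcases List.mem_cons.mp h with rfl | h'
        · rcases hp1 with h'' | h''
          · exact ⟨ca ++ cb, hXmem, List.mem_append_left _ h''⟩
          · exact ⟨ca ++ cb, hXmem, List.mem_append_right _ h''⟩
        · rcases List.mem_singleton.mp h' with rfl
          rcases hp2 with h'' | h''
          · exact ⟨ca ++ cb, hXmem, List.mem_append_left _ h''⟩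
          · exact ⟨ca ++ cb, hXmem, List.mem_append_right _ h''⟩
  · intro q hq
    have hXmem : ca ++ cb ∈ pre ++ (ca ++ cb) :: (mid ++ post) := List.mem_append_right _ List.mem_cons_self
    rcases List.mem_append.mp hq with h | h
    · rcases hcls q h with ⟨c, hc, h1, h2⟩
      rw [hdec] at hc
      rcases List.mem_append.mp hc with h' | h'
      · exact ⟨c, List.mem_append_left _ h', h1, h2⟩
      · rcases List.mem_cons.mp h' with hceq | h''
        · exact ⟨ca ++ cb, hXmem, List.mem_append_left _ (hceq ▸ h1), List.mem_append_left _ (hceq ▸ h2)⟩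
        · rcases List.mem_append.mp h'' with h3 | h3
          · exact ⟨c, List.mem_append_right _ (List.mem_cons_of_mem _ (List.mem_append_left _ h3)), h1, h2⟩
          · rcases List.mem_cons.mp h3 with hceq | h4
            · exact ⟨ca ++ cb, hXmem, List.mem_append_right _ (hceq ▸ h1), List.mem_append_right _ (hceq ▸ h2)⟩
            · exact ⟨c, List.mem_append_right _ (List.mem_cons_of_mem _ (List.mem_append_right _ h4)), h1, h2⟩
    · rcases List.mem_singleton.mp h with rfl
      refine ⟨ca ++ cb, hXmem, ?_, ?_⟩
      · rcases hp1 with h'' | h''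
        · exact List.mem_append_left _ h''
        · exact List.mem_append_right _ h''
      · rcases hp2 with h'' | h''
        · exact List.mem_append_left _ h''
        · exact List.mem_append_right _ h''
  · intro c hc x hx y hy
    rcases List.mem_append.mp hc with h | h
    · exact conn_mono _ _ (hcon c (hmemcomps c (Or.inl h)) x hx y hy)
    · rcases List.mem_cons.mp h with rfl | h'
      · rcases List.mem_append.mp hx with hxa | hxb <;> rcases List.mem_append.mp hy with hya | hyb
        · exact conn_mono _ _ (hcon ca hca x hxa y hya)
        · exact Relation.ReflTransGen.trans (conn_mono _ _ (hcon ca hca x hxa u hu))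
            (Relation.ReflTransGen.trans hconn_uw (conn_mono _ _ (hcon cb hcb w hw y hyb)))
        · exact Relation.ReflTransGen.trans (conn_mono _ _ (hcon cb hcb x hxb w hw))
            (Relation.ReflTransGen.trans hconn_wu (conn_mono _ _ (hcon ca hca u hu y hya)))
        · exact conn_mono _ _ (hcon cb hcb x hxb y hyb)
      · rcases List.mem_append.mp h' with h'' | h''
        · exact conn_mono _ _ (hcon c (hmemcomps c (Or.inr (Or.inl h''))) x hx y hy)
        · exact conn_mono _ _ (hcon c (hmemcomps c (Or.inr (Or.inr h''))) x hx y hy)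
  · rw [keysOf_eq_of_mem ps p h1f h2f]
    set f := cellIdx (KeysOf ps) with hf
    have hmap_old : comps.map f = pre.map f ++ f ca :: (mid.map f ++ f cb :: post.map f) := by
      rw [hdec]
      simp
    have hmap_old' := hord
    rw [hmap_old] at hmap_old'
    -- f ca < f cb
    have hfafb : f ca < f cb := by
      rcases List.pairwise_append.mp hmap_old' with ⟨_, hpc, _⟩
      rcases List.pairwise_cons.mp hpc with ⟨hhead, _⟩
      exact hhead (f cb) (List.mem_append_right _ List.mem_cons_self)
    have hmerged : f (ca ++ cb) = f ca := by
      rw [hf]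
      unfold cellIdx
      rw [findIdx_congr_mem _ _ (fun k => decide (k ∈ ca) || decide (k ∈ cb))
        (fun x _ => by simp [List.mem_append])]
      rw [findIdx_or_min]
      exact Nat.min_eq_left (Nat.le_of_lt hfafb)
    have hmapnew : (pre ++ (ca ++ cb) :: (mid ++ post)).map f =
        pre.map f ++ f ca :: (mid.map f ++ post.map f) := by
      simp [hmerged]
    rw [hmapnew]
    have hsub : (pre.map f ++ f ca :: (mid.map f ++ post.map f)).Sublist
        (pre.map f ++ f ca :: (mid.map f ++ f cb :: post.map f)) := by
      apply List.Sublist.append_left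
      apply List.Sublist.cons₂
      apply List.Sublist.append_left
      exact List.sublist_cons_self _ _
    exact hmap_old'.sublist hsub

lemma pairStep_inv (ps : List (String × String)) (p : String × String) (comps : List (List String))
    (h : CompsInv ps comps) : CompsInv (ps ++ [p]) (pairStep comps p) := by
  obtain ⟨hne, hnd, hdisj, hcov, hcls, hcon, hord⟩ := h
  have hnotmem_flat : ∀ v, locate comps v = none → v ∉ flatPairs ps := by
    intro v hv hvf
    rcases (hcov v).mpr hvf with ⟨c, hc, hvc⟩
    exact (locate_eq_none_iff comps v).mp hv c hc hvc
  have hmem_flat : ∀ c ∈ comps, ∀ x ∈ c, x ∈ flatPairs ps := by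
    intro c hc x hx
    exact (hcov x).mp ⟨c, hc, hx⟩
  unfold pairStep
  cases hs : locate comps p.1 <;> cases ht : locate comps p.2
  · -- both endpoints fresh: a new cell is appended
    have hsf : p.1 ∉ flatPairs ps := hnotmem_flat _ hs
    have htf : p.2 ∉ flatPairs ps := hnotmem_flat _ ht
    have hsc : ∀ c ∈ comps, p.1 ∉ c := (locate_eq_none_iff _ _).mp hs
    have htc : ∀ c ∈ comps, p.2 ∉ c := (locate_eq_none_iff _ _).mp ht
    set cell := if p.1 = p.2 then [p.1] else [p.1, p.2] with hcell
    have hcellmem : ∀ x, x ∈ cell ↔ x = p.1 ∨ x = p.2 := by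
      intro x
      by_cases hst : p.1 = p.2 <;> simp [hcell, hst]
    refine ⟨?_, ?_, ?_, ?_, ?_, ?_, ?_⟩
    · intro c hc
      rcases List.mem_append.mp hc with h | h
      · exact hne c h
      · rcases List.mem_singleton.mp h with rfl
        by_cases hst : p.1 = p.2 <;> simp [hcell, hst]
    · intro c hc
      rcases List.mem_append.mp hc with h | h
      · exact hnd c h
      · rcases List.mem_singleton.mp h with rfl
        by_cases hst : p.1 = p.2 <;> simp [hcell, hst]
    · rw [List.pairwise_append]
      refine ⟨hdisj, List.pairwise_singleton _ _, ?_⟩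
      intro c hc c' hc' x hxc
      rcases List.mem_singleton.mp hc' with rfl
      rw [hcellmem]
      rintro (rfl | rfl)
      · exact hsc c hc hxc
      · exact htc c hc hxc
    · intro x
      rw [flatPairs_append]
      constructor
      · rintro ⟨c, hc, hxc⟩
        rcases List.mem_append.mp hc with h | h
        · exact List.mem_append_left _ ((hcov x).mp ⟨c, h, hxc⟩)
        · rcases List.mem_singleton.mp h with rfl
          rcases (hcellmem x).mp hxc with rfl | rfl
          · exact List.mem_append_right _ List.mem_cons_self
          · exact List.mem_append_right _ (by simp)
      · intro hx
        rcases List.mem_append.mp hx with h | h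
        · rcases (hcov x).mpr h with ⟨c, hc, hxc⟩
          exact ⟨c, List.mem_append_left _ hc, hxc⟩
        · refine ⟨cell, List.mem_append_right _ (List.mem_singleton_self _), ?_⟩
          rw [hcellmem]
          rcases List.mem_cons.mp h with rfl | h'
          · exact Or.inl rfl
          · exact Or.inr (List.mem_singleton.mp h')
    · intro q hq
      rcases List.mem_append.mp hq with h | h
      · rcases hcls q h with ⟨c, hc, h1, h2⟩
        exact ⟨c, List.mem_append_left _ hc, h1, h2⟩
      · rcases List.mem_singleton.mp h with rfl
        refine ⟨cell, List.mem_append_right _ (List.mem_singleton_self _), ?_, ?_⟩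
        · rw [hcellmem]; exact Or.inl rfl
        · rw [hcellmem]; exact Or.inr rfl
    · intro c hc x hx y hy
      rcases List.mem_append.mp hc with h | h
      · exact conn_mono _ _ (hcon c h x hx y hy)
      · rcases List.mem_singleton.mp h with rfl
        have hstep : Conn (ps ++ [p]) p.1 p.2 := Relation.ReflTransGen.single (prel_last ps p)
        have hstep' : Conn (ps ++ [p]) p.2 p.1 := Relation.ReflTransGen.single (prel_symm' (prel_last ps p))
        rcases (hcellmem x).mp hx with rfl | rfl <;> rcases (hcellmem y).mp hy with rfl | rfl
        · exact Relation.ReflTransGen.refl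
        · exact hstep
        · exact hstep'
        · exact Relation.ReflTransGen.refl
    · -- ordering
      rcases keysOf_append_decomp ps p with ⟨ext, hKe, hfresh, hextv, hp1ext⟩
      have hsK : p.1 ∉ KeysOf ps := by
        intro hc
        exact hsf (by simpa [KeysOf, PySem.Set.mem_ofList] using hc)
      have htK : p.2 ∉ KeysOf ps := by
        intro hc
        exact htf (by simpa [KeysOf, PySem.Set.mem_ofList] using hc)
      rw [List.map_append, hKe]
      have hmapold : comps.map (cellIdx (KeysOf ps ++ ext)) = comps.map (cellIdx (KeysOf ps)) := by
        apply List.map_congr_left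
        intro c hc
        rcases List.exists_mem_of_ne_nil c (hne c hc) with ⟨x, hx⟩
        have hxK : x ∈ KeysOf ps := by
          simpa [KeysOf, PySem.Set.mem_ofList] using hmem_flat c hc x hx
        exact (old_cellIdx _ ext c x hx hxK).1
      have hnewidx : cellIdx (KeysOf ps ++ ext) cell = (KeysOf ps).length + ext.findIdx (fun k => decide (k ∈ cell)) := by
        unfold cellIdx
        rw [List.findIdx_append, if_neg]
        · omega
        · intro hlt
          rcases List.findIdx_lt_length.mp hlt with ⟨x, hxK, hx⟩
          rcases (hcellmem x).mp (by simpa using hx) with rfl | rfl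
          · exact hsK hxK
          · exact htK hxK
      rw [hmapold, List.map_singleton]
      rw [List.pairwise_append]
      refine ⟨hord, List.pairwise_singleton _ _, ?_⟩
      intro n hn m hm
      rcases List.mem_singleton.mp hm with rfl
      rcases List.mem_map.mp hn with ⟨c, hc, rfl⟩
      rcases List.exists_mem_of_ne_nil c (hne c hc) with ⟨x, hx⟩
      have hxK : x ∈ KeysOf ps := by
        simpa [KeysOf, PySem.Set.mem_ofList] using hmem_flat c hc x hx
      have := (old_cellIdx (KeysOf ps) ext c x hx hxK).2
      rw [hnewidx]
      omega
  · -- p.1 fresh, p.2 in cell j: extend that cell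
    rename_i j
    show CompsInv (ps ++ [p]) (comps.set j (comps.getD j [] ++ [p.1]))
    rcases locate_eq_some comps p.2 j ht with ⟨pre, ct, post, hdec, hlen, htc, _⟩
    have hres : comps.set j (comps.getD j [] ++ [p.1]) = pre ++ (ct ++ [p.1]) :: post := by
      rw [hdec, ← hlen, getD_append_len, set_append_len]
    rw [hres]
    exact extend_inv ps p comps pre post ct ⟨hne, hnd, hdisj, hcov, hcls, hcon, hord⟩ hdec
      p.1 p.2 (Or.inl ⟨rfl, rfl⟩) ((locate_eq_none_iff _ _).mp hs) htc
  · -- p.2 fresh, p.1 in cell i: extend that cell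
    rename_i i
    show CompsInv (ps ++ [p]) (comps.set i (comps.getD i [] ++ [p.2]))
    rcases locate_eq_some comps p.1 i hs with ⟨pre, ct, post, hdec, hlen, hsc, _⟩
    have hres : comps.set i (comps.getD i [] ++ [p.2]) = pre ++ (ct ++ [p.2]) :: post := by
      rw [hdec, ← hlen, getD_append_len, set_append_len]
    rw [hres]
    exact extend_inv ps p comps pre post ct ⟨hne, hnd, hdisj, hcov, hcls, hcon, hord⟩ hdec
      p.2 p.1 (Or.inr ⟨rfl, rfl⟩) ((locate_eq_none_iff _ _).mp ht) hsc
  · -- both endpoints already located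
    rename_i i j
    show CompsInv (ps ++ [p]) (if i = j then comps else (comps.set (min i j) (comps.getD (min i j) [] ++ comps.getD (max i j) [])).eraseIdx (max i j))
    by_cases hij : i = j
    · rw [if_pos hij]
      subst hij
      rcases locate_eq_some comps p.1 i hs with ⟨pre1, ca, post1, hdec1, hlen1, hsc, _⟩
      rcases locate_eq_some comps p.2 i ht with ⟨pre2, cb, post2, hdec2, hlen2, htc, _⟩
      have hpl : pre1.length = pre2.length := by rw [hlen1, hlen2]
      have h12 : pre1 ++ ca :: post1 = pre2 ++ cb :: post2 := hdec1.symm.trans hdec2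
      have hcc : ca = cb := by
        rcases List.append_inj h12 hpl with ⟨_, htail⟩
        exact (List.cons.injEq _ _ _ _).mp htail |>.1
      refine unchanged_inv ps p comps ⟨hne, hnd, hdisj, hcov, hcls, hcon, hord⟩ ⟨ca, ?_, hsc, hcc ▸ htc⟩
      rw [hdec1]
      exact List.mem_append_right _ List.mem_cons_self
    · rw [if_neg hij]
      rcases Nat.lt_trichotomy i j with hlt | heq | hgt
      · -- i < j : p.1's cell comes first
        rw [Nat.min_eq_left (Nat.le_of_lt hlt), Nat.max_eq_right (Nat.le_of_lt hlt)]
        rcases locate_eq_some comps p.1 i hs with ⟨pre1, ca, s1, hdec1, hlen1, hsc, _⟩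
        rcases locate_eq_some comps p.2 j ht with ⟨pre2, cb, s2, hdec2, hlen2, htc, _⟩
        rcases double_split hdec1 hdec2 (by omega) with ⟨mid, hpre2, hs1⟩
        have hdec : comps = pre1 ++ ca :: (mid ++ cb :: s2) := by rw [hdec1, hs1]
        have hlenb : (pre1 ++ ca :: mid).length = j := by
          have := congrArg List.length hpre2
          simp at this
          simp
          omega
        have hgetA : comps.getD i [] = ca := by rw [hdec, ← hlen1, getD_append_len]
        have hgetB : comps.getD j [] = cb := by
          have hdecb : comps = (pre1 ++ ca :: mid) ++ cb :: s2 := by rw [hdec]; simp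
          rw [hdecb, ← hlenb, getD_append_len]
        have hres : (comps.set i (comps.getD i [] ++ comps.getD j [])).eraseIdx j =
            pre1 ++ (ca ++ cb) :: (mid ++ s2) := by
          rw [hgetA, hgetB]
          have hset : comps.set i (ca ++ cb) = (pre1 ++ (ca ++ cb) :: mid) ++ cb :: s2 := by
            rw [hdec, ← hlen1, set_append_len]
            simp
          have hlenb2 : (pre1 ++ (ca ++ cb) :: mid).length = j := by
            have := congrArg List.length hpre2
            simp at this
            simp
            omega
          rw [hset, ← hlenb2, eraseIdx_append_len]
          simp
        rw [hres]
        exact merge_inv ps p comps pre1 mid s2 ca cb ⟨hne, hnd, hdisj, hcov, hcls, hcon, hord⟩ hdec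
          (Or.inl hsc) (Or.inr htc) p.1 p.2 hsc htc (prel_last ps p)
      · exact absurd heq hij
      · -- j < i : p.2's cell comes first
        rw [Nat.min_eq_right (Nat.le_of_lt hgt), Nat.max_eq_left (Nat.le_of_lt hgt)]
        rcases locate_eq_some comps p.2 j ht with ⟨pre1, ca, s1, hdec1, hlen1, htc, _⟩
        rcases locate_eq_some comps p.1 i hs with ⟨pre2, cb, s2, hdec2, hlen2, hsc, _⟩
        rcases double_split hdec1 hdec2 (by omega) with ⟨mid, hpre2, hs1⟩
        have hdec : comps = pre1 ++ ca :: (mid ++ cb :: s2) := by rw [hdec1, hs1]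
        have hlenb : (pre1 ++ ca :: mid).length = i := by
          have := congrArg List.length hpre2
          simp at this
          simp
          omega
        have hgetA : comps.getD j [] = ca := by rw [hdec, ← hlen1, getD_append_len]
        have hgetB : comps.getD i [] = cb := by
          have hdecb : comps = (pre1 ++ ca :: mid) ++ cb :: s2 := by rw [hdec]; simp
          rw [hdecb, ← hlenb, getD_append_len]
        have hres : (comps.set j (comps.getD j [] ++ comps.getD i [])).eraseIdx i =
            pre1 ++ (ca ++ cb) :: (mid ++ s2) := by
          rw [hgetA, hgetB]
          have hset : comps.set j (ca ++ cb) = (pre1 ++ (ca ++ cb) :: mid) ++ cb :: s2 := by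
            rw [hdec, ← hlen1, set_append_len]
            simp
          have hlenb2 : (pre1 ++ (ca ++ cb) :: mid).length = i := by
            have := congrArg List.length hpre2
            simp at this
            simp
            omega
          rw [hset, ← hlenb2, eraseIdx_append_len]
          simp
        rw [hres]
        exact merge_inv ps p comps pre1 mid s2 ca cb ⟨hne, hnd, hdisj, hcov, hcls, hcon, hord⟩ hdec
          (Or.inr hsc) (Or.inl htc) p.2 p.1 htc hsc (prel_symm' (prel_last ps p))




lemma compsOf_inv (ps : List (String × String)) : CompsInv ps (compsOf ps) := by
  induction ps using List.reverseRecOn with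
  | nil =>
    refine ⟨?_, ?_, ?_, ?_, ?_, ?_, ?_⟩ <;> simp [compsOf, flatPairs]
  | append_singleton ps p ih =>
    have : compsOf (ps ++ [p]) = pairStep (compsOf ps) p := by
      unfold compsOf
      rw [List.foldl_append]
      rfl
    rw [this]
    exact pairStep_inv ps p (compsOf ps) ih

lemma cell_closed {ps : List (String × String)} {comps : List (List String)}
    (h : CompsInv ps comps) {c : List String} (hc : c ∈ comps) {x y : String}
    (hx : x ∈ c) (hrel : PRel ps x y) : y ∈ c := by
  obtain ⟨hne, hnd, hdisj, hcov, hcls, hcon, hord⟩ := h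
  rcases hrel with h' | h'
  · rcases hcls (x, y) h' with ⟨c', hc', h1, h2⟩
    rw [disjoint_unique hdisj hc hc' hx h1]
    exact h2
  · rcases hcls (y, x) h' with ⟨c', hc', h1, h2⟩
    rw [disjoint_unique hdisj hc hc' hx h2]
    exact h1

lemma cell_conn_closed {ps : List (String × String)} {comps : List (List String)}
    (h : CompsInv ps comps) {c : List String} (hc : c ∈ comps) {x y : String}
    (hx : x ∈ c) (hconn : Conn ps x y) : y ∈ c := by
  induction hconn with
  | refl => exact hx
  | tail _ hstep ih => exact cell_closed h hc ih hstep

lemma aconn_iff_conn (ps : List (String × String)) (x y : String) :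
    AConn (adjOf ps) x y ↔ Conn ps x y := by
  constructor
  · intro h
    refine Relation.ReflTransGen.mono ?_ h
    intro a b hab
    exact (adjOf_getD ps a b).mp hab
  · intro h
    refine Relation.ReflTransGen.mono ?_ h
    intro a b hab
    exact (adjOf_getD ps a b).mpr hab

-- the accumulator-style strict-max fold over cells (A's `largest_component` update rule)
def bestOf (cells : List (List String)) : List String :=
  cells.foldl (fun acc c => if acc.length < c.length then c else acc) []

lemma bestOf_aux_mem (cells : List (List String)) :
    ∀ acc : List String, cells.foldl (fun acc c => if acc.length < c.length then c else acc) acc = acc ∨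
      cells.foldl (fun acc c => if acc.length < c.length then c else acc) acc ∈ cells := by
  induction cells with
  | nil => intro acc; exact Or.inl rfl
  | cons c cells ih =>
    intro acc
    rw [List.foldl_cons]
    by_cases hlt : acc.length < c.length
    · rw [if_pos hlt]
      rcases ih c with h | h
      · exact Or.inr (by rw [h]; exact List.mem_cons_self)
      · exact Or.inr (List.mem_cons_of_mem _ h)
    · rw [if_neg hlt]
      rcases ih acc with h | h
      · exact Or.inl h
      · exact Or.inr (List.mem_cons_of_mem _ h)

lemma filter_lt_succ (l : List (List String)) (f : List String → Nat)
    (hp : (l.map f).Pairwise (· < ·)) (p : Nat) :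
    l.filter (fun c => decide (f c < p + 1)) =
      l.filter (fun c => decide (f c < p)) ++ l.filter (fun c => decide (f c = p)) := by
  induction l with
  | nil => rfl
  | cons c0 l ih =>
    rw [List.map_cons, List.pairwise_cons] at hp
    obtain ⟨hbound, hp'⟩ := hp
    have hb : ∀ d ∈ l, f c0 < f d := by
      intro d hd
      exact hbound (f d) (List.mem_map.mpr ⟨d, hd, rfl⟩)
    rcases Nat.lt_trichotomy (f c0) p with hlt | heq | hgt
    · rw [List.filter_cons, List.filter_cons, List.filter_cons]
      simp only [show decide (f c0 < p + 1) = true by simp; omega,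
        show decide (f c0 < p) = true by simp; omega,
        show decide (f c0 = p) = false by simp; omega]
      rw [ih hp']
      simp
    · have hnil1 : l.filter (fun c => decide (f c < p)) = [] := by
        rw [List.filter_eq_nil_iff]
        intro d hd
        have := hb d hd
        simp
        omega
      have hnil2 : l.filter (fun c => decide (f c = p)) = [] := by
        rw [List.filter_eq_nil_iff]
        intro d hd
        have := hb d hd
        simp
        omega
      have hnil3 : l.filter (fun c => decide (f c < p + 1)) = [] := by
        rw [List.filter_eq_nil_iff]
        intro d hd
        have := hb d hd
        simp
        omega
      rw [List.filter_cons, List.filter_cons, List.filter_cons]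
      simp only [show decide (f c0 < p + 1) = true by simp; omega,
        show decide (f c0 < p) = false by simp; omega,
        show decide (f c0 = p) = true by simp; omega]
      rw [hnil1, hnil2, hnil3]
      rfl
    · have hnil1 : l.filter (fun c => decide (f c < p)) = [] := by
        rw [List.filter_eq_nil_iff]
        intro d hd
        have := hb d hd
        simp
        omega
      have hnil2 : l.filter (fun c => decide (f c = p)) = [] := by
        rw [List.filter_eq_nil_iff]
        intro d hd
        have := hb d hd
        simp
        omega
      have hnil3 : l.filter (fun c => decide (f c < p + 1)) = [] := by
        rw [List.filter_eq_nil_iff]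
        intro d hd
        have := hb d hd
        simp
        omega
      rw [List.filter_cons, List.filter_cons, List.filter_cons]
      simp only [show decide (f c0 < p + 1) = false by simp; omega,
        show decide (f c0 < p) = false by simp; omega,
        show decide (f c0 = p) = false by simp; omega]
      rw [hnil1, hnil2, hnil3]
      rfl

lemma filter_f_eq {l : List (List String)} {f : List String → Nat}
    (hp : (l.map f).Pairwise (· < ·)) {c : List String} (hc : c ∈ l) :
    l.filter (fun d => decide (f d = f c)) = [c] := by
  induction l with
  | nil => cases hc
  | cons c0 l ih =>
    rw [List.map_cons, List.pairwise_cons] at hp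
    obtain ⟨hbound, hp'⟩ := hp
    have hb : ∀ d ∈ l, f c0 < f d := by
      intro d hd
      exact hbound (f d) (List.mem_map.mpr ⟨d, hd, rfl⟩)
    rcases List.mem_cons.mp hc with rfl | hcl
    · rw [List.filter_cons]
      simp only [decide_eq_true_eq, if_pos rfl, decide_true, if_true]
      have : l.filter (fun d => decide (f d = f c)) = [] := by
        rw [List.filter_eq_nil_iff]
        intro d hd
        have := hb d hd
        simp
        omega
      rw [this]
    · have hne : f c0 ≠ f c := Nat.ne_of_lt (hb c hcl)
      rw [List.filter_cons]
      simp only [show decide (f c0 = f c) = false by simp [hne]]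
      exact ih hp' hcl

def maxL (cells : List (List String)) : Nat := (cells.map List.length).foldl Nat.max 0

lemma foldl_max_init (l : List Nat) : ∀ a : Nat, l.foldl Nat.max a = Nat.max a (l.foldl Nat.max 0) := by
  induction l with
  | nil => intro a; simp
  | cons b l ih =>
    intro a
    rw [List.foldl_cons, ih (Nat.max a b), List.foldl_cons, ih (Nat.max 0 b)]
    simp [Nat.max_assoc, Nat.zero_max]

lemma maxL_cons (c : List String) (cells : List (List String)) :
    maxL (c :: cells) = max c.length (maxL cells) := by
  unfold maxL
  rw [List.map_cons, List.foldl_cons, foldl_max_init, foldl_max_init (cells.map List.length) 0]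
  simp [Nat.zero_max]

lemma exists_maxL (cells : List (List String)) (hne : cells ≠ []) :
    ∃ c ∈ cells, c.length = maxL cells := by
  induction cells with
  | nil => exact absurd rfl hne
  | cons c cells ih =>
    rw [maxL_cons]
    by_cases h : cells = []
    · subst h
      exact ⟨c, List.mem_cons_self, by simp [maxL]⟩
    · rcases ih h with ⟨d, hd, hdl⟩
      rcases Nat.le_total c.length (maxL cells) with hle | hle
      · exact ⟨d, List.mem_cons_of_mem _ hd, by rw [hdl, Nat.max_eq_right hle]⟩
      · exact ⟨c, List.mem_cons_self, by rw [Nat.max_eq_left hle]⟩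

lemma bestOf_aux_find (cells : List (List String)) :
    ∀ acc : List String,
      cells.foldl (fun acc c => if acc.length < c.length then c else acc) acc =
        if maxL cells ≤ acc.length then acc
        else (cells.find? (fun c => c.length == maxL cells)).getD acc := by
  induction cells with
  | nil => intro acc; simp [maxL]
  | cons c cells ih =>
    intro acc
    rw [List.foldl_cons, maxL_cons]
    by_cases hA : max c.length (maxL cells) ≤ acc.length
    · rw [if_pos hA]
      have hc : ¬ acc.length < c.length := by
        have := Nat.le_max_left c.length (maxL cells)
        omega
      rw [if_neg hc, ih acc, if_pos (by
        have := Nat.le_max_right c.length (maxL cells)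
        omega)]
    · rw [if_neg hA]
      by_cases hb1 : acc.length < c.length
      · rw [if_pos hb1, ih c]
        by_cases hb1a : c.length = max c.length (maxL cells)
        · rw [List.find?_cons_of_pos (by simp [hb1a.symm])]
          rw [if_pos (by omega)]
          simp
        · have hM : max c.length (maxL cells) = maxL cells := by
            rcases Nat.le_total c.length (maxL cells) with h | h
            · exact Nat.max_eq_right h
            · exact absurd (Nat.max_eq_left h).symm hb1a
          have hclt : c.length < maxL cells := by
            have := Nat.le_max_left c.length (maxL cells)
            omega
          rw [List.find?_cons_of_neg (by simp; omega), if_neg (by omega), hM]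
          have hnnil : cells ≠ [] := by
            intro h
            subst h
            simp [maxL] at hclt
          rcases exists_maxL cells hnnil with ⟨d, hd, hdl⟩
          have : (cells.find? (fun c => c.length == maxL cells)).isSome := by
            rw [List.find?_isSome]
            exact ⟨d, hd, by simp [hdl]⟩
          rcases Option.isSome_iff_exists.mp this with ⟨r, hr⟩
          rw [hr]
          rfl
      · rw [if_neg hb1, ih acc]
        have hM : max c.length (maxL cells) = maxL cells := by
          rcases Nat.le_total c.length (maxL cells) with h | h
          · exact Nat.max_eq_right h
          · have : max c.length (maxL cells) = c.length := Nat.max_eq_left h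
            omega
        have hclt : c.length < maxL cells := by
          have := Nat.le_max_left c.length (maxL cells)
          omega
        rw [List.find?_cons_of_neg (by simp; omega), if_neg (by omega), hM]


lemma exploreComponent_spec (adj : PySem.Dict String (PySem.Set String))
    (hsym : ∀ x y, y ∈ adj.getD x [] → x ∈ adj.getD y [])
    (hsub : ∀ x y, y ∈ adj.getD x [] → y ∈ adj.keys)
    (hknd : adj.keys.Nodup)
    (start : String) (visited₀ : PySem.Set String)
    (hv₀cl : ∀ x ∈ visited₀, ∀ y, y ∈ adj.getD x [] → y ∈ visited₀)
    (hs₀ : start ∉ visited₀) (hstartK : start ∈ adj.keys) :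
    (∀ x, x ∈ (exploreComponent start adj visited₀).1 ↔ x ∈ visited₀ ∨ AConn adj start x) ∧
    (∀ x, x ∈ (exploreComponent start adj visited₀).2 ↔ AConn adj start x ∧ x ∉ visited₀) ∧
    (exploreComponent start adj visited₀).2.Nodup := by
  unfold exploreComponent
  have := exploreLoop_spec adj start visited₀ hsym hsub hknd hv₀cl hs₀ (exploreFuel adj)
    [start] visited₀ []
    (by
      unfold dfsMeasure exploreFuel
      have hle : (adj.keys.length - nvis adj.keys visited₀) * ((adj.values.map List.length).sum + 1) ≤
          adj.keys.length * ((adj.values.map List.length).sum + 1) :=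
        Nat.mul_le_mul_right _ (Nat.sub_le _ _)
      simp only [List.length_cons, List.length_nil]
      omega)
    (by intro x hx; rcases List.mem_singleton.mp hx with rfl; exact hstartK)
    (by intro x hx; rcases List.mem_singleton.mp hx with rfl; exact Relation.ReflTransGen.refl)
    (Or.inr (List.mem_singleton_self _))
    (by
      intro x hx y hy
      exact Or.inl (hv₀cl x hx y hy))
    (fun x hx => Or.inl hx)
    (fun x hx => hx)
    (by simp)
    List.nodup_nil
  exact this


def lcStep (adj : PySem.Dict String (PySem.Set String)) (st : PySem.Set String × PySem.Set String) (start : String) : PySem.Set String × PySem.Set String :=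
  if st.1.contains start then st
  else
    let r := exploreComponent start adj st.1
    (r.1, if st.2.length < r.2.length then r.2 else st.2)

lemma largestComponent_eq (adj : PySem.Dict String (PySem.Set String)) :
    largestComponent adj = (adj.keys.foldl (lcStep adj) ([], [])).2 := rfl

lemma prel_flat {ps : List (String × String)} {x y : String} (h : PRel ps x y) :
    x ∈ flatPairs ps ∧ y ∈ flatPairs ps := by
  rcases h with h | h
  · constructor
    · exact List.mem_flatMap.mpr ⟨(x, y), h, by simp⟩
    · exact List.mem_flatMap.mpr ⟨(x, y), h, by simp⟩
  · constructor
    · exact List.mem_flatMap.mpr ⟨(y, x), h, by simp⟩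
    · exact List.mem_flatMap.mpr ⟨(y, x), h, by simp⟩

lemma adj_sym (ps : List (String × String)) :
    ∀ x y, y ∈ (adjOf ps).getD x [] → x ∈ (adjOf ps).getD y [] := by
  intro x y h
  exact (adjOf_getD ps y x).mpr (prel_symm' ((adjOf_getD ps x y).mp h))

lemma adj_sub (ps : List (String × String)) :
    ∀ x y, y ∈ (adjOf ps).getD x [] → y ∈ (adjOf ps).keys := by
  intro x y h
  rw [adjOf_keys]
  exact (PySem.Set.mem_ofList _ _).mpr (prel_flat ((adjOf_getD ps x y).mp h)).2

lemma adj_keys_nodup (ps : List (String × String)) : (adjOf ps).keys.Nodup := by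
  rw [adjOf_keys]
  exact PySem.Set.nodup_ofList _

lemma bestOf_append_singleton (xs : List (List String)) (c : List String) :
    bestOf (xs ++ [c]) = if (bestOf xs).length < c.length then c else bestOf xs := by
  unfold bestOf
  rw [List.foldl_append]
  rfl

lemma bestOf_nodup {comps : List (List String)} (hnd : ∀ c ∈ comps, c.Nodup)
    (l : List (List String)) (hsub : ∀ c ∈ l, c ∈ comps) : (bestOf l).Nodup := by
  rcases bestOf_aux_mem l [] with h | h
  · rw [bestOf, h]
    exact List.nodup_nil
  · exact hnd _ (hsub _ h)

lemma seq_length_eq {s t : List String} (h : SEq s t) (hs : s.Nodup) (ht : t.Nodup) :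
    s.length = t.length :=
  ((List.perm_ext_iff_of_nodup hs ht).mpr h).length_eq

lemma simulate (ps : List (String × String)) (comps : List (List String)) (hinv : CompsInv ps comps) :
    ∀ (KS pfx : List String) (visited largest : PySem.Set String),
      KeysOf ps = pfx ++ KS →
      (∀ x, x ∈ visited ↔ ∃ c, c ∈ comps ∧ cellIdx (KeysOf ps) c < pfx.length ∧ x ∈ c) →
      SEq largest (bestOf (comps.filter (fun c => decide (cellIdx (KeysOf ps) c < pfx.length)))) →
      largest.Nodup →
      SEq (KS.foldl (lcStep (adjOf ps)) (visited, largest)).2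
          (bestOf (comps.filter (fun c => decide (cellIdx (KeysOf ps) c < (KeysOf ps).length)))) ∧
      (KS.foldl (lcStep (adjOf ps)) (visited, largest)).2.Nodup := by
  obtain ⟨hne, hnd, hdisj, hcov, hcls, hcon, hord⟩ := hinv
  have hinv' : CompsInv ps comps := ⟨hne, hnd, hdisj, hcov, hcls, hcon, hord⟩
  intro KS
  induction KS with
  | nil =>
    intro pfx visited largest hK hvis hl hlnd
    have hpfx : pfx = KeysOf ps := by simpa using hK.symm
    subst hpfx
    exact ⟨hl, hlnd⟩
  | cons k KS' ih =>
    intro pfx visited largest hK hvis hl hlnd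
    rw [List.foldl_cons]
    have hkK : k ∈ KeysOf ps := by rw [hK]; exact List.mem_append_right _ List.mem_cons_self
    have hkflat : k ∈ flatPairs ps := (PySem.Set.mem_ofList _ _).mp hkK
    rcases (hcov k).mpr hkflat with ⟨c, hc, hkc⟩
    have hunique : ∀ c', c' ∈ comps → k ∈ c' → c' = c := by
      intro c' hc' hkc'
      exact disjoint_unique hdisj hc' hc hkc' hkc
    have hfc : cellIdx (KeysOf ps) c < pfx.length ∨ cellIdx (KeysOf ps) c = pfx.length := by
      unfold cellIdx
      rw [hK, List.findIdx_append]
      by_cases hlt : pfx.findIdx (fun x => decide (x ∈ c)) < pfx.length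
      · rw [if_pos hlt]
        exact Or.inl hlt
      · rw [if_neg hlt]
        right
        rw [List.findIdx_cons]
        simp [hkc]
    have hKlen : pfx.length < (KeysOf ps).length := by
      rw [hK]
      simp
    have hKp : (KeysOf ps)[pfx.length]'hKlen = k := by
      have : (pfx ++ k :: KS')[pfx.length]'(by simp) = k := by
        rw [List.getElem_append_right (Nat.le_refl _)]
        simp
      simp_rw [hK]
      exact this
    have hnop : ∀ c', c' ∈ comps → cellIdx (KeysOf ps) c' = pfx.length → c' = c := by
      intro c' hc' hfc'
      unfold cellIdx at hfc'
      have hlt' : (KeysOf ps).findIdx (fun x => decide (x ∈ c')) < (KeysOf ps).length := by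
        rw [hfc']
        exact hKlen
      have h1 := List.findIdx_getElem (p := fun x => decide (x ∈ c')) (xs := KeysOf ps) (w := hlt')
      simp_rw [hfc'] at h1
      rw [hKp] at h1
      exact hunique c' hc' (by simpa using h1)
    rcases hfc with hlt | heq
    · -- k already visited: the step is a no-op
      have hkv : k ∈ visited := (hvis k).mpr ⟨c, hc, hlt, hkc⟩
      have hstep : lcStep (adjOf ps) (visited, largest) k = (visited, largest) := by
        unfold lcStep
        rw [if_pos ((PySem.Set.contains_iff _ _).mpr hkv)]
      rw [hstep]
      have hfact : ∀ c', c' ∈ comps →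
          (cellIdx (KeysOf ps) c' < pfx.length + 1 ↔ cellIdx (KeysOf ps) c' < pfx.length) := by
        intro c' hc'
        constructor
        · intro h
          rcases Nat.lt_succ_iff_lt_or_eq.mp h with h' | h'
          · exact h'
          · have := hnop c' hc' h'
            subst this
            omega
        · omega
      refine ih (pfx ++ [k]) visited largest (by rw [hK]; simp) ?_ ?_ hlnd
      · intro x
        rw [hvis x]
        simp only [List.length_append, List.length_cons, List.length_nil]
        constructor
        · rintro ⟨c', hc', h1, h2⟩
          exact ⟨c', hc', by omega, h2⟩
        · rintro ⟨c', hc', h1, h2⟩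
          exact ⟨c', hc', by rw [← hfact c' hc']; omega, h2⟩
      · have hfeq : comps.filter (fun c' => decide (cellIdx (KeysOf ps) c' < (pfx ++ [k]).length)) =
            comps.filter (fun c' => decide (cellIdx (KeysOf ps) c' < pfx.length)) := by
          apply List.filter_congr
          intro c' hc'
          apply decide_eq_decide.mpr
          simp only [List.length_append, List.length_cons, List.length_nil]
          rw [show pfx.length + 1 = pfx.length + 1 from rfl]
          have := hfact c' hc'
          omega
        rw [hfeq]
        exact hl
    · -- k starts the cell c
      have hkNv : k ∉ visited := by
        intro hin
        rcases (hvis k).mp hin with ⟨c', hc', hlt', hkc'⟩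
        have := hunique c' hc' hkc'
        subst this
        omega
      have hccon : PySem.Set.contains visited k = false := by
        cases h : PySem.Set.contains visited k
        · rfl
        · exact absurd ((PySem.Set.contains_iff _ _).mp h) hkNv
      have hstep : lcStep (adjOf ps) (visited, largest) k =
          ((exploreComponent k (adjOf ps) visited).1,
            if largest.length < (exploreComponent k (adjOf ps) visited).2.length
            then (exploreComponent k (adjOf ps) visited).2 else largest) := by
        unfold lcStep
        rw [if_neg (by rw [hccon]; simp)]
      rw [hstep]
      have hv₀cl : ∀ x ∈ visited, ∀ y, y ∈ (adjOf ps).getD x [] → y ∈ visited := by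
        intro x hx y hy
        rcases (hvis x).mp hx with ⟨c', hc', hlt', hxc'⟩
        exact (hvis y).mpr ⟨c', hc', hlt', cell_closed hinv' hc' hxc' ((adjOf_getD ps x y).mp hy)⟩
      obtain ⟨hr1, hr2, hr2nd⟩ := exploreComponent_spec (adjOf ps) (adj_sym ps) (adj_sub ps)
        (adj_keys_nodup ps) k visited hv₀cl hkNv (by rw [adjOf_keys]; exact hkK)
      have hmemc_iff : ∀ x, (AConn (adjOf ps) k x ∧ x ∉ visited) ↔ x ∈ c := by
        intro x
        constructor
        · rintro ⟨hac, _⟩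
          exact cell_conn_closed hinv' hc hkc ((aconn_iff_conn ps k x).mp hac)
        · intro hx
          refine ⟨(aconn_iff_conn ps k x).mpr (hcon c hc k hkc x hx), ?_⟩
          intro hin
          rcases (hvis x).mp hin with ⟨c', hc', hlt', hxc'⟩
          have : c' = c := disjoint_unique hdisj hc' hc hxc' hx
          subst this
          omega
      have hr2c : SEq (exploreComponent k (adjOf ps) visited).2 c := by
        intro x
        rw [hr2 x, hmemc_iff x]
      have hsplit : comps.filter (fun c' => decide (cellIdx (KeysOf ps) c' < pfx.length + 1)) =
          comps.filter (fun c' => decide (cellIdx (KeysOf ps) c' < pfx.length)) ++ [c] := by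
        rw [filter_lt_succ comps (cellIdx (KeysOf ps)) hord pfx.length]
        congr 1
        have h1 : comps.filter (fun c' => decide (cellIdx (KeysOf ps) c' = pfx.length)) =
            comps.filter (fun c' => decide (cellIdx (KeysOf ps) c' = cellIdx (KeysOf ps) c)) := by
          apply List.filter_congr
          intro c' _
          apply decide_eq_decide.mpr
          rw [heq]
        rw [h1]
        exact filter_f_eq hord hc
      have hbnodup : (bestOf (comps.filter (fun c' => decide (cellIdx (KeysOf ps) c' < pfx.length)))).Nodup :=
        bestOf_nodup hnd _ (fun c' hc' => (List.mem_filter.mp hc').1)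
      have hlen1 : largest.length =
          (bestOf (comps.filter (fun c' => decide (cellIdx (KeysOf ps) c' < pfx.length)))).length :=
        seq_length_eq hl hlnd hbnodup
      have hlen2 : (exploreComponent k (adjOf ps) visited).2.length = c.length :=
        seq_length_eq hr2c hr2nd (hnd c hc)
      have hnewbest : SEq (if largest.length < (exploreComponent k (adjOf ps) visited).2.length
            then (exploreComponent k (adjOf ps) visited).2 else largest)
          (bestOf (comps.filter (fun c' => decide (cellIdx (KeysOf ps) c' < pfx.length + 1)))) := by
        rw [hsplit, bestOf_append_singleton]
        rw [hlen1, hlen2]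
        by_cases hcmp : (bestOf (comps.filter (fun c' => decide (cellIdx (KeysOf ps) c' < pfx.length)))).length < c.length
        · rw [if_pos hcmp, if_pos hcmp]
          exact hr2c
        · rw [if_neg hcmp, if_neg hcmp]
          exact hl
      have hnewnodup : (if largest.length < (exploreComponent k (adjOf ps) visited).2.length
            then (exploreComponent k (adjOf ps) visited).2 else largest).Nodup := by
        by_cases hcmp : largest.length < (exploreComponent k (adjOf ps) visited).2.length
        · rw [if_pos hcmp]; exact hr2nd
        · rw [if_neg hcmp]; exact hlnd
      refine ih (pfx ++ [k]) _ _ (by rw [hK]; simp) ?_ ?_ hnewnodup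
      · intro x
        rw [hr1 x]
        simp only [List.length_append, List.length_cons, List.length_nil]
        constructor
        · rintro (hin | hac)
          · rcases (hvis x).mp hin with ⟨c', hc', hlt', hxc'⟩
            exact ⟨c', hc', by omega, hxc'⟩
          · by_cases hxv : x ∈ visited
            · rcases (hvis x).mp hxv with ⟨c', hc', hlt', hxc'⟩
              exact ⟨c', hc', by omega, hxc'⟩
            · exact ⟨c, hc, by omega, (hmemc_iff x).mp ⟨hac, hxv⟩⟩
        · rintro ⟨c', hc', hlt', hxc'⟩
          by_cases hcc : c' = c
          · subst hcc
            exact Or.inr ((aconn_iff_conn ps k x).mpr (hcon c' hc' k hkc x hxc'))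
          · have hltp : cellIdx (KeysOf ps) c' < pfx.length := by
              rcases Nat.lt_succ_iff_lt_or_eq.mp hlt' with h' | h'
              · exact h'
              · exact absurd (hnop c' hc' h') hcc
            exact Or.inl ((hvis x).mpr ⟨c', hc', hltp, hxc'⟩)
      · simpa using hnewbest


lemma filter_all (comps : List (List String)) (ps : List (String × String))
    (hinv : CompsInv ps comps) :
    comps.filter (fun c => decide (cellIdx (KeysOf ps) c < (KeysOf ps).length)) = comps := by
  obtain ⟨hne, hnd, hdisj, hcov, hcls, hcon, hord⟩ := hinv
  apply List.filter_eq_self.mpr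
  intro c hc
  rcases List.exists_mem_of_ne_nil c (hne c hc) with ⟨x, hx⟩
  have hxK : x ∈ KeysOf ps := (PySem.Set.mem_ofList _ _).mpr ((hcov x).mp ⟨c, hc, hx⟩)
  have hlt : (KeysOf ps).findIdx (fun k => decide (k ∈ c)) < (KeysOf ps).length :=
    List.findIdx_lt_length.mpr ⟨x, hxK, by simp [hx]⟩
  simpa [cellIdx] using hlt

lemma largest_seq_bestOf (ps : List (String × String)) (comps : List (List String))
    (hinv : CompsInv ps comps) :
    SEq (largestComponent (adjOf ps)) (bestOf comps) ∧ (largestComponent (adjOf ps)).Nodup := by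
  have hsim := simulate ps comps hinv (KeysOf ps) [] [] []
    (by simp)
    (by intro x; constructor
        · intro h; cases h
        · rintro ⟨c, _, h, _⟩; simp at h)
    (by
      have : comps.filter (fun c => decide (cellIdx (KeysOf ps) c < (0 : Nat))) = [] := by
        apply List.filter_eq_nil_iff.mpr
        intro c _
        simp
      intro x
      simp [this, bestOf])
    List.nodup_nil
  rw [largestComponent_eq, adjOf_keys]
  rw [filter_all comps ps hinv] at hsim
  exact ⟨hsim.1, hsim.2⟩

lemma bestOf_eq_selection (comps : List (List String)) (hne : comps ≠ [])
    (hnonempty : ∀ c ∈ comps, c ≠ []) :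
    bestOf comps = (comps.find? (fun c => c.length == maxL comps)).getD [] := by
  have := bestOf_aux_find comps []
  rw [bestOf, this]
  rcases exists_maxL comps hne with ⟨c, hc, hlen⟩
  have hpos : 0 < maxL comps := by
    rw [← hlen]
    cases hcc : c with
    | nil => exact absurd hcc (hnonempty c hc)
    | cons a l => simp [hcc]
  rw [if_neg (by simp; omega)]

-- membership-equal keep sets give identical sampling decisions and identical final filters
lemma seq_contains {s t : PySem.Set String} (h : SEq s t) (x : String) :
    PySem.Set.contains s x = PySem.Set.contains t x := by
  cases hs : PySem.Set.contains s x <;> cases ht : PySem.Set.contains t x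
  · rfl
  · exact absurd ((PySem.Set.contains_iff _ _).mpr ((h x).mpr ((PySem.Set.contains_iff _ _).mp ht))) (by rw [hs]; simp)
  · exact absurd ((PySem.Set.contains_iff _ _).mpr ((h x).mp ((PySem.Set.contains_iff _ _).mp hs))) (by rw [ht]; simp)
  · rfl

lemma addSamples_seq (nodes : List (List (String × String))) (k1 k2 : PySem.Set String)
    (spt : Int) (h : SEq k1 k2) :
    SEq (addSamples nodes k1 spt) (addSamples nodes k2 spt) := by
  show SEq
    ((nodes.foldl (fun (st : PySem.Set String × PySem.Dict String Int) n =>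
        if st.1.contains (pvGetD n "id" "") then st
        else if spt ≤ st.2.getD (pvGetD n "table" "") 0 then st
        else (st.1.add (pvGetD n "id" ""), st.2.insert (pvGetD n "table" "") (st.2.getD (pvGetD n "table" "") 0 + 1)))
      (k1, nodes.foldl (fun d n =>
        if k1.contains (pvGetD n "id" "") then d.modify (pvGetD n "table" "") 0 (· + 1) else d)
        PySem.Dict.empty)).1)
    ((nodes.foldl (fun (st : PySem.Set String × PySem.Dict String Int) n =>
        if st.1.contains (pvGetD n "id" "") then st
        else if spt ≤ st.2.getD (pvGetD n "table" "") 0 then st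
        else (st.1.add (pvGetD n "id" ""), st.2.insert (pvGetD n "table" "") (st.2.getD (pvGetD n "table" "") 0 + 1)))
      (k2, nodes.foldl (fun d n =>
        if k2.contains (pvGetD n "id" "") then d.modify (pvGetD n "table" "") 0 (· + 1) else d)
        PySem.Dict.empty)).1)
  have hper : nodes.foldl (fun (d : PySem.Dict String Int) n =>
      if k1.contains (pvGetD n "id" "") then d.modify (pvGetD n "table" "") 0 (· + 1) else d)
      PySem.Dict.empty =
    nodes.foldl (fun (d : PySem.Dict String Int) n =>
      if k2.contains (pvGetD n "id" "") then d.modify (pvGetD n "table" "") 0 (· + 1) else d)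
      PySem.Dict.empty := by
    apply List.foldl_ext
    intro d n _
    rw [seq_contains h]
  suffices hgen : ∀ (ns : List (List (String × String))) (s1 s2 : PySem.Set String)
      (per1 per2 : PySem.Dict String Int), per1 = per2 → SEq s1 s2 →
      SEq (ns.foldl (fun (st : PySem.Set String × PySem.Dict String Int) n =>
            if st.1.contains (pvGetD n "id" "") then st
            else if spt ≤ st.2.getD (pvGetD n "table" "") 0 then st
            else (st.1.add (pvGetD n "id" ""), st.2.insert (pvGetD n "table" "") (st.2.getD (pvGetD n "table" "") 0 + 1)))
          (s1, per1)).1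
        ((ns.foldl (fun (st : PySem.Set String × PySem.Dict String Int) n =>
            if st.1.contains (pvGetD n "id" "") then st
            else if spt ≤ st.2.getD (pvGetD n "table" "") 0 then st
            else (st.1.add (pvGetD n "id" ""), st.2.insert (pvGetD n "table" "") (st.2.getD (pvGetD n "table" "") 0 + 1)))
          (s2, per2)).1) by
    exact hgen nodes k1 k2 _ _ hper h
  intro ns
  induction ns with
  | nil => intro s1 s2 per1 per2 hpe h12; exact h12
  | cons n ns ih =>
    intro s1 s2 per1 per2 hpe h12
    subst hpe
    rw [List.foldl_cons, List.foldl_cons]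
    rw [show PySem.Set.contains s1 (pvGetD n "id" "") = PySem.Set.contains s2 (pvGetD n "id" "") from seq_contains h12 _]
    by_cases hc : PySem.Set.contains s2 (pvGetD n "id" "") = true
    · rw [if_pos hc, if_pos hc]
      exact ih s1 s2 per1 per1 rfl h12
    · rw [if_neg hc, if_neg hc]
      by_cases hcnt : spt ≤ per1.getD (pvGetD n "table" "") 0
      · rw [if_pos hcnt, if_pos hcnt]
        exact ih s1 s2 per1 per1 rfl h12
      · rw [if_neg hcnt, if_neg hcnt]
        apply ih _ _ _ _ rfl
        intro x
        rw [PySem.Set.mem_add, PySem.Set.mem_add, h12 x]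


lemma optInSet_seq {s t : PySem.Set String} (h : SEq s t) (o : Option String) :
    optInSet o s = optInSet o t := by
  cases o with
  | none => rfl
  | some v => exact seq_contains h v

lemma a_eq (nodes edges : List (List (String × String))) (spt : Int) :
    prioritize_connected_view nodes edges spt =
      (if nodes.isEmpty then (nodes, edges)
       else if (buildAdjacency nodes edges).size = 0 then (nodes, edges)
       else (filterNodes nodes (addSamples nodes (largestComponent (buildAdjacency nodes edges)) spt),
             filterEdges edges (addSamples nodes (largestComponent (buildAdjacency nodes edges)) spt))) := rfl

lemma alt_eq (nodes edges : List (List (String × String))) (spt : Int) :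
    prioritize_connected_view_alt nodes edges spt =
      (if (mergeComponents (nodeIdSet nodes) edges).isEmpty then (nodes, edges)
       else
         (filterNodes nodes (addSamples nodes (PySem.Set.ofList
            (((mergeComponents (nodeIdSet nodes) edges).find? (fun c => c.length ==
              ((mergeComponents (nodeIdSet nodes) edges).map List.length).foldl Nat.max 0)).getD [])) spt),
          filterEdges edges (addSamples nodes (PySem.Set.ofList
            (((mergeComponents (nodeIdSet nodes) edges).find? (fun c => c.length ==
              ((mergeComponents (nodeIdSet nodes) edges).map List.length).foldl Nat.max 0)).getD [])) spt))) := rfl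

lemma accList_nil_N (edges : List (List (String × String))) : accList [] edges = [] := by
  unfold accList
  apply List.filterMap_eq_nil_iff.mpr
  intro e _
  unfold accPair
  cases pvGet e "source" <;> cases pvGet e "target" <;> simp [optInSet]

lemma ofList_eq_nil {l : List String} (h : PySem.Set.ofList l = []) : l = [] := by
  cases hl : l with
  | nil => rfl
  | cons a l' =>
    exfalso
    have : a ∈ PySem.Set.ofList l := (PySem.Set.mem_ofList _ _).mpr (hl ▸ List.mem_cons_self)
    rw [h] at this
    cases this

lemma flatPairs_eq_nil {ps : List (String × String)} (h : flatPairs ps = []) : ps = [] := by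
  cases hp : ps with
  | nil => rfl
  | cons p ps' =>
    exfalso
    rw [hp] at h
    simp [flatPairs] at h

lemma compsOf_ne_nil {ps : List (String × String)} (h : ps ≠ []) : compsOf ps ≠ [] := by
  obtain ⟨hne, hnd, hdisj, hcov, hcls, hcon, hord⟩ := compsOf_inv ps
  rcases List.exists_mem_of_ne_nil ps h with ⟨p, hp⟩
  intro hc
  have hflat : p.1 ∈ flatPairs ps := List.mem_flatMap.mpr ⟨p, hp, by simp⟩
  rcases (hcov p.1).mpr hflat with ⟨c, hcmem, _⟩
  rw [hc] at hcmem
  cases hcmem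

theorem main_eq (nodes edges : List (List (String × String))) (spt : Int) :
    prioritize_connected_view nodes edges spt = prioritize_connected_view_alt nodes edges spt := by
  rw [a_eq, alt_eq]
  rw [buildAdjacency_eq, mergeComponents_eq]
  set N := nodeIdSet nodes with hN
  set ps := accList N edges with hps
  by_cases hnil : nodes.isEmpty
  · rw [if_pos hnil]
    have hnodes : nodes = [] := List.isEmpty_iff.mp hnil
    have hNnil : N = [] := by rw [hN, hnodes]; rfl
    have hpsnil : ps = [] := by rw [hps, hNnil, accList_nil_N]
    rw [hpsnil]
    rfl
  · rw [if_neg hnil]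
    by_cases hz : (adjOf ps).size = 0
    · rw [if_pos hz]
      have hkeys : (adjOf ps).keys = [] := (dict_size_zero_iff _).mp hz
      have hpsnil : ps = [] := by
        apply flatPairs_eq_nil
        apply ofList_eq_nil
        rw [← adjOf_keys]
        exact hkeys
      rw [hpsnil]
      rfl
    · rw [if_neg hz]
      have hpsne : ps ≠ [] := by
        intro h
        apply hz
        rw [h]
        rfl
      have hinv := compsOf_inv ps
      obtain ⟨hne, hnd, hdisj, hcov, hcls, hcon, hord⟩ := hinv
      have hinv' : CompsInv ps (compsOf ps) := ⟨hne, hnd, hdisj, hcov, hcls, hcon, hord⟩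
      have hcompsne : compsOf ps ≠ [] := compsOf_ne_nil hpsne
      rw [if_neg (by simpa [List.isEmpty_iff] using hcompsne)]
      -- B's selected cell is bestOf
      have hbnodup : (bestOf (compsOf ps)).Nodup := bestOf_nodup hnd _ (fun c h => h)
      have hsel : PySem.Set.ofList (((compsOf ps).find? (fun c => c.length ==
          ((compsOf ps).map List.length).foldl Nat.max 0)).getD []) = bestOf (compsOf ps) := by
        rw [show ((compsOf ps).map List.length).foldl Nat.max 0 = maxL (compsOf ps) from rfl]
        rw [← bestOf_eq_selection _ hcompsne hne]
        exact PySem.Set.ofList_eq_self_of_nodup _ hbnodup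
      rw [hsel]
      have hlg := largest_seq_bestOf ps (compsOf ps) hinv'
      have hkeep : SEq (addSamples nodes (largestComponent (adjOf ps)) spt)
          (addSamples nodes (bestOf (compsOf ps)) spt) :=
        addSamples_seq nodes _ _ spt hlg.1
      have hfn : filterNodes nodes (addSamples nodes (largestComponent (adjOf ps)) spt) =
          filterNodes nodes (addSamples nodes (bestOf (compsOf ps)) spt) := by
        apply List.filter_congr
        intro n _
        exact seq_contains hkeep _
      have hfe : filterEdges edges (addSamples nodes (largestComponent (adjOf ps)) spt) =
          filterEdges edges (addSamples nodes (bestOf (compsOf ps)) spt) := by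
        apply List.filter_congr
        intro e _
        rw [optInSet_seq hkeep, optInSet_seq hkeep]
      rw [hfn, hfe]


-- ===== VERDICT (by name: the statement is the Claim_ definition above) =====
theorem prioritize_connected_view_spec : Claim_equal_prioritize_connected_view := by
  intro nodes edges spt _ _
  unfold Spec_prioritize_connected_view
  exact main_eq nodes edges spt
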